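-- pv_equiv track=rewrite | github.com/wyk18703232953/myResearch | codeComplex/data/filteredData/python/quadratic/python_quadratic_0368.py | solve_from_grid
-- ===== SOURCE A (Python) =====
-- def solve_from_grid(n, m, l):
--     colsum = [[0 for _ in range(m)] for _ in range(n)]
--     rowsum = [[0 for _ in range(m)] for _ in range(n)]
--     col = [[0 for _ in range(m)] for _ in range(n)]
--     row = [[0 for _ in range(m)] for _ in range(n)]
--     tot = []
--
--     for i in range(n):
--         for j in range(m):
--             if l[i][j] == '*':
--                 rowsum[i][j] = 1
--                 colsum[i][j] = 1
--                 row[i][j] = 1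
--                 col[i][j] = 1
--
--     for i in range(n):
--         for j in range(1, m):
--             if l[i][j] == '.':
--                 continue
--             rowsum[i][j] += rowsum[i][j - 1]
--
--     for i in range(n):
--         for j in range(m - 2, -1, -1):
--             if l[i][j] == '.':
--                 continue
--             row[i][j] += row[i][j + 1]
--
--     for i in range(m):
--         for j in range(n - 2, -1, -1):
--             if l[j][i] == '.':
--                 continue
--             col[j][i] += col[j + 1][i]
--
--     for i in range(m):
--         for j in range(1, n):
--             if l[j][i] == '.':
--                 continue
--             colsum[j][i] += colsum[j - 1][i]
--
--     def check(x, y):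
--         i = x
--         j = y
--         ans = min(row[i][j], rowsum[i][j], colsum[i][j], col[i][j]) - 1
--         if ans == 0:
--             return []
--         return [ans]
--
--     h = [[0 for _ in range(m + 1)] for _ in range(n)]
--     v = [[0 for _ in range(m)] for _ in range(n + 1)]
--
--     for i in range(n):
--         for j in range(m):
--             if l[i][j] == '*':
--                 ans_list = check(i, j)
--                 for j1 in ans_list:
--                     tot.append([i + 1, j + 1, j1])
--                     h[i][j - j1] += 1
--                     h[i][j + j1 + 1] -= 1
--                     v[i - j1][j] += 1
--                     v[i + j1 + 1][j] -= 1
--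
--     for i in range(n):
--         for j in range(1, m):
--             h[i][j] += h[i][j - 1]
--
--     for i in range(m):
--         for j in range(1, n):
--             v[j][i] += v[j - 1][i]
--
--     for i in range(n):
--         for j in range(m):
--             if l[i][j] == '*' and h[i][j] == 0 and v[i][j] == 0:
--                 return -1, []
--
--     return len(tot), tot
-- ===== SOURCE B (Python) =====
-- def solve_from_grid(n, m, l):
--     # Simpler strategy: per-line run-length scans instead of in-place prefix
--     # passes, and a direct "does some reported cross cover this star" scan
--     # instead of +-1 difference arrays with accumulation passes.
--     if n <= 0 or m <= 0:
--         return 0, []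
--
--     def runs(cells):
--         out = []
--         run = 0
--         for c in cells:
--             if c == '.':
--                 run = 0
--             if c == '*':
--                 run += 1
--             out.append(run)
--         return out
--
--     rows = [l[i][:m] for i in range(n)]
--     left = [runs(r) for r in rows]
--     right = [runs(r[::-1])[::-1] for r in rows]
--     cols = [[rows[i][j] for i in range(n)] for j in range(m)]
--     up = [runs(c) for c in cols]          # up[j][i]
--     down = [runs(c[::-1])[::-1] for c in cols]
--
--     tot = []
--     for i in range(n):
--         for j in range(m):
--             if rows[i][j] == '*':
--                 a = min(left[i][j], right[i][j], up[j][i], down[j][i]) - 1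
--                 if a > 0:
--                     tot.append([i + 1, j + 1, a])
--
--     for i in range(n):
--         for j in range(m):
--             if rows[i][j] == '*' and not any(
--                     (r - 1 == i and abs(j - (c - 1)) <= a) or
--                     (c - 1 == j and abs(i - (r - 1)) <= a)
--                     for r, c, a in tot):
--                 return -1, []
--     return len(tot), tot
-- ===== Notes on version B (the rewrite author's own statement) =====
-- stated objective: simpler
-- what changed: B replaces A's four in-place prefix/suffix accumulation passes over 2D arrays by one reusable run-length scan applied to each row, reversed row, column and reversed column, and replaces A's +-1 difference arrays h/v with their two accumulation passes by a direct scan that checks for each star whether some reported cross covers it.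
import Mathlib
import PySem

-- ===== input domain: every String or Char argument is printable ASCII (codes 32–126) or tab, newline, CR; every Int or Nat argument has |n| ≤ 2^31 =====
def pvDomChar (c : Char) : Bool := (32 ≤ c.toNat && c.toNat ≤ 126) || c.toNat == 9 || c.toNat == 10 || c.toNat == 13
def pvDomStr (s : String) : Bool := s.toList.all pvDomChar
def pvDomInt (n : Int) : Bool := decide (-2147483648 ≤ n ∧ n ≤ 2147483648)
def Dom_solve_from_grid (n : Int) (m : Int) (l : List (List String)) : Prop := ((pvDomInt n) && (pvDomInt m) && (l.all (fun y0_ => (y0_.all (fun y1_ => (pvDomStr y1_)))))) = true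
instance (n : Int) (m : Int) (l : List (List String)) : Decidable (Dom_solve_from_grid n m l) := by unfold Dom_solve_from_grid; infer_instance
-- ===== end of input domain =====

-- B replaces A's four in-place prefix/suffix passes by one reusable run-length
-- scan applied per row/column, and replaces the ±1 difference arrays h/v (plus
-- their accumulation passes) by a direct per-star scan of the reported crosses
-- (objective: simpler; equivalence is about the return value, nothing is mutated).

-- ===== PORT A =====
-- A's mutable 2D integer arrays are modelled as total functions Int → Int → Int;
-- under Pre_ every Python array access is in range, where this model is exact.
-- Each helper below is one loop of the Python, in source order.
def pvUpd2 (f : Int → Int → Int) (i j v : Int) : Int → Int → Int :=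
  fun a b => if a = i ∧ b = j then v else f a b

-- l[i][j]; exact under Pre_ (indices are in range wherever A reads the grid)
def pvCellA (l : List (List String)) (i j : Int) : String :=
  PySem.List.pyGetD (PySem.List.pyGetD l i []) j ""

-- first loop: the four indicator arrays (rowsum, colsum, row, col)
def pvInitA (n m : Int) (l : List (List String)) :
    (Int → Int → Int) × (Int → Int → Int) × (Int → Int → Int) × (Int → Int → Int) :=
  (PySem.List.pyRange 0 n 1).foldl (fun st i =>
    (PySem.List.pyRange 0 m 1).foldl (fun st j =>
      if pvCellA l i j == "*" then
        (pvUpd2 st.1 i j 1, pvUpd2 st.2.1 i j 1, pvUpd2 st.2.2.1 i j 1, pvUpd2 st.2.2.2 i j 1)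
      else st) st)
    ((fun _ _ => 0), (fun _ _ => 0), (fun _ _ => 0), (fun _ _ => 0))

def pvRowsumA (n m : Int) (l : List (List String)) : Int → Int → Int :=
  (PySem.List.pyRange 0 n 1).foldl (fun rs i =>
    (PySem.List.pyRange 1 m 1).foldl (fun rs j =>
      if pvCellA l i j == "." then rs else pvUpd2 rs i j (rs i j + rs i (j - 1))) rs) (pvInitA n m l).1

def pvRowA (n m : Int) (l : List (List String)) : Int → Int → Int :=
  (PySem.List.pyRange 0 n 1).foldl (fun r i =>
    (PySem.List.pyRange (m - 2) (-1) (-1)).foldl (fun r j =>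
      if pvCellA l i j == "." then r else pvUpd2 r i j (r i j + r i (j + 1))) r) (pvInitA n m l).2.2.1

def pvColA (n m : Int) (l : List (List String)) : Int → Int → Int :=
  (PySem.List.pyRange 0 m 1).foldl (fun c i =>
    (PySem.List.pyRange (n - 2) (-1) (-1)).foldl (fun c j =>
      if pvCellA l j i == "." then c else pvUpd2 c j i (c j i + c (j + 1) i)) c) (pvInitA n m l).2.2.2

def pvColsumA (n m : Int) (l : List (List String)) : Int → Int → Int :=
  (PySem.List.pyRange 0 m 1).foldl (fun cs i =>
    (PySem.List.pyRange 1 n 1).foldl (fun cs j =>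
      if pvCellA l j i == "." then cs else pvUpd2 cs j i (cs j i + cs (j - 1) i)) cs) (pvInitA n m l).2.1

def pvCheckA (n m : Int) (l : List (List String)) (x y : Int) : List Int :=
  let ans := min (min (min (pvRowA n m l x y) (pvRowsumA n m l x y)) (pvColsumA n m l x y)) (pvColA n m l x y) - 1
  if ans == 0 then [] else [ans]

-- second star loop: collect tot and the ±1 difference marks in h and v
def pvStarsA (n m : Int) (l : List (List String)) :
    List (List Int) × (Int → Int → Int) × (Int → Int → Int) :=
  (PySem.List.pyRange 0 n 1).foldl (fun st i =>
    (PySem.List.pyRange 0 m 1).foldl (fun st j =>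
      if pvCellA l i j == "*" then
        (pvCheckA n m l i j).foldl (fun st j1 =>
          let tot := st.1 ++ [[i + 1, j + 1, j1]]
          let h := pvUpd2 st.2.1 i (j - j1) (st.2.1 i (j - j1) + 1)
          let h := pvUpd2 h i (j + j1 + 1) (h i (j + j1 + 1) - 1)
          let v := pvUpd2 st.2.2 (i - j1) j (st.2.2 (i - j1) j + 1)
          let v := pvUpd2 v (i + j1 + 1) j (v (i + j1 + 1) j - 1)
          (tot, h, v)) st
      else st) st) ([], (fun _ _ => 0), (fun _ _ => 0))

def pvHA (n m : Int) (l : List (List String)) : Int → Int → Int :=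
  (PySem.List.pyRange 0 n 1).foldl (fun h i =>
    (PySem.List.pyRange 1 m 1).foldl (fun h j => pvUpd2 h i j (h i j + h i (j - 1))) h) (pvStarsA n m l).2.1

def pvVA (n m : Int) (l : List (List String)) : Int → Int → Int :=
  (PySem.List.pyRange 0 m 1).foldl (fun v i =>
    (PySem.List.pyRange 1 n 1).foldl (fun v j => pvUpd2 v j i (v j i + v (j - 1) i)) v) (pvStarsA n m l).2.2

def solve_from_grid (n : Int) (m : Int) (l : List (List String)) : Int × List (List Int) :=
  if (PySem.List.pyRange 0 n 1).any (fun i =>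
      (PySem.List.pyRange 0 m 1).any (fun j =>
        pvCellA l i j == "*" && pvHA n m l i j == 0 && pvVA n m l i j == 0)) then
    (-1, [])
  else (((pvStarsA n m l).1.length : Int), (pvStarsA n m l).1)

-- ===== PORT B =====
def pvRunsB (cells : List String) : List Int :=
  (cells.foldl (fun (st : List Int × Int) c =>
    let run := if c == "." then 0 else st.2
    let run := if c == "*" then run + 1 else run
    (st.1 ++ [run], run)) ([], 0)).1

-- e covers (i,j) by its horizontal or vertical arm; tot entries are the
-- 3-element lists B itself appended, so the catch-all branch is never taken
def pvCovers (i j : Int) (e : List Int) : Bool :=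
  match e with
  | [r, c, a] => (r - 1 == i && decide (|j - (c - 1)| ≤ a)) ||
                 (c - 1 == j && decide (|i - (r - 1)| ≤ a))
  | _ => false

def pvRowsB (n m : Int) (l : List (List String)) : List (List String) :=
  (PySem.List.pyRange 0 n 1).map (fun i =>
    PySem.List.slice (PySem.List.pyGetD l i []) none (some m))

def pvGetRB (n m : Int) (l : List (List String)) (i j : Int) : String :=
  PySem.List.pyGetD (PySem.List.pyGetD (pvRowsB n m l) i []) j ""

def pvColsB (n m : Int) (l : List (List String)) : List (List String) :=
  (PySem.List.pyRange 0 m 1).map (fun j =>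
    (PySem.List.pyRange 0 n 1).map (fun i => pvGetRB n m l i j))

def pvGiB (xss : List (List Int)) (i j : Int) : Int :=
  PySem.List.pyGetD (PySem.List.pyGetD xss i []) j 0

def pvLeftB (n m : Int) (l : List (List String)) : List (List Int) :=
  (pvRowsB n m l).map pvRunsB
def pvRightB (n m : Int) (l : List (List String)) : List (List Int) :=
  (pvRowsB n m l).map (fun r => (pvRunsB r.reverse).reverse)
def pvUpB (n m : Int) (l : List (List String)) : List (List Int) :=
  (pvColsB n m l).map pvRunsB
def pvDownB (n m : Int) (l : List (List String)) : List (List Int) :=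
  (pvColsB n m l).map (fun c => (pvRunsB c.reverse).reverse)

def pvTotB (n m : Int) (l : List (List String)) : List (List Int) :=
  (PySem.List.pyRange 0 n 1).foldl (fun tot i =>
    (PySem.List.pyRange 0 m 1).foldl (fun tot j =>
      if pvGetRB n m l i j == "*" then
        let a := min (min (min (pvGiB (pvLeftB n m l) i j) (pvGiB (pvRightB n m l) i j))
                   (pvGiB (pvUpB n m l) j i)) (pvGiB (pvDownB n m l) j i) - 1
        if 0 < a then tot ++ [[i + 1, j + 1, a]] else tot
      else tot) tot) []

def solve_from_grid_alt (n : Int) (m : Int) (l : List (List String)) : Int × List (List Int) :=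
  if n ≤ 0 ∨ m ≤ 0 then (0, [])
  else
    if (PySem.List.pyRange 0 n 1).any (fun i =>
        (PySem.List.pyRange 0 m 1).any (fun j =>
          pvGetRB n m l i j == "*" && !((pvTotB n m l).any (pvCovers i j)))) then
      (-1, [])
    else (((pvTotB n m l).length : Int), pvTotB n m l)

-- ===== PRECONDITION & SPEC =====
-- Pre_ excludes exactly the inputs on which A raises IndexError: when both
-- n and m are positive, l must have at least n rows each of length at least m.
def Pre_solve_from_grid (n : Int) (m : Int) (l : List (List String)) : Prop :=
  0 < n → 0 < m → (n ≤ (l.length : Int) ∧ ∀ r ∈ l.take n.toNat, m ≤ (r.length : Int))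
instance (n : Int) (m : Int) (l : List (List String)) : Decidable (Pre_solve_from_grid n m l) := by
  unfold Pre_solve_from_grid; infer_instance

def pvWitness_solve_from_grid : Int × Int × List (List String) :=
  (2, 3, [["*", ".", "*"], ["*", "*", "*"]])

def Spec_solve_from_grid (n : Int) (m : Int) (l : List (List String)) (out : Int × List (List Int)) : Prop := out = solve_from_grid_alt n m l
instance (n : Int) (m : Int) (l : List (List String)) (out : Int × List (List Int)) : Decidable (Spec_solve_from_grid n m l out) := by unfold Spec_solve_from_grid; infer_instance

-- ===== CLAIM (what is proved, stated in full; the proofs are below) =====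
def Claim_equal_solve_from_grid : Prop := ∀ (n : Int) (m : Int) (l : List (List String)), Dom_solve_from_grid n m l → Pre_solve_from_grid n m l → Spec_solve_from_grid n m l (solve_from_grid n m l)

-- ===== LEMMAS AND PROOFS =====

-- generic foldl invariant
theorem pvFoldInv {α β : Type} (C : β → Prop) (L : List α) (f : β → α → β) (init : β)
    (h0 : C init) (hs : ∀ st a, a ∈ L → C st → C (f st a)) : C (L.foldl f init) := by
  induction L generalizing init with
  | nil => exact h0
  | cons x t ih =>
      exact ih (f init x) (hs init x (by simp) h0) (fun st a ha hC => hs st a (by simp [ha]) hC)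

theorem pvUpd2_ne (f : Int → Int → Int) (i j v a b : Int) (h : ¬ (a = i ∧ b = j)) :
    pvUpd2 f i j v a b = f a b := by simp [pvUpd2, h]

theorem pvUpd2_self (f : Int → Int → Int) (i j v : Int) : pvUpd2 f i j v i j = v := by
  simp [pvUpd2]

-- the inner (forward) line pass of A's prefix loops, as a function of the upper bound t
def pvLineF (g : Int → Int → Bool) (i t : Int) (f : Int → Int → Int) : Int → Int → Int :=
  (PySem.List.pyRange 1 t 1).foldl (fun f j => if g i j then f else pvUpd2 f i j (f i j + f i (j - 1))) f

theorem pvLineF_outside (g : Int → Int → Bool) (i t : Int) (f : Int → Int → Int)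
    (a b : Int) (h : a ≠ i ∨ b < 1 ∨ t ≤ b) : pvLineF g i t f a b = f a b := by
  unfold pvLineF
  refine pvFoldInv (fun (f' : Int → Int → Int) => f' a b = f a b) _ _ _ rfl ?_
  intro st j hj hC
  have hj' := (PySem.List.mem_pyRange_one).1 hj
  by_cases hg : g i j
  · simp [hg, hC]
  · rw [if_neg hg, pvUpd2_ne]
    · exact hC
    · rintro ⟨rfl, rfl⟩; rcases h with h | h | h
      · exact h rfl
      · omega
      · omega

-- the line pass output on line i depends only on the input's line i
theorem pvLineF_dep (g : Int → Int → Bool) (i : Int) (L : List Int) (f f' : Int → Int → Int)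
    (h : ∀ b, f i b = f' i b) :
    ∀ b, (L.foldl (fun f j => if g i j then f else pvUpd2 f i j (f i j + f i (j - 1))) f) i b
       = (L.foldl (fun f j => if g i j then f else pvUpd2 f i j (f i j + f i (j - 1))) f') i b := by
  induction L generalizing f f' with
  | nil => exact h
  | cons x t ih =>
      intro b
      apply ih
      intro c
      beta_reduce
      by_cases hg : g i x
      · simp [hg, h]
      · rw [if_neg hg, if_neg hg]
        unfold pvUpd2
        by_cases hc : (i = i ∧ c = x)
        · rw [if_pos hc, if_pos hc, h, h]
        · rw [if_neg hc, if_neg hc, h]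

-- positions strictly below t are unchanged by the segment of the pass from t upward
theorem pvLineF_stable (g : Int → Int → Bool) (i t t' : Int) (f : Int → Int → Int)
    (h1 : 1 ≤ t) (h2 : t ≤ t') (a b : Int) (hb : b < t) :
    pvLineF g i t' f a b = pvLineF g i t f a b := by
  unfold pvLineF
  rw [PySem.List.pyRange_one_append 1 t t' h1 h2, List.foldl_append]
  refine pvFoldInv (fun (f' : Int → Int → Int) => f' a b =
    (PySem.List.pyRange 1 t 1).foldl (fun f j => if g i j then f else pvUpd2 f i j (f i j + f i (j - 1))) f a b) _ _ _ rfl ?_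
  intro st j hj hC
  have hj' := (PySem.List.mem_pyRange_one).1 hj
  by_cases hg : g i j
  · simp [hg, hC]
  · rw [if_neg hg, pvUpd2_ne]
    · exact hC
    · rintro ⟨rfl, rfl⟩; omega

-- the recurrence satisfied by the line pass inside the active region
theorem pvLineF_rec (g : Int → Int → Bool) (i t : Int) (f : Int → Int → Int)
    (b : Int) (hb : 1 ≤ b) (hb2 : b < t) :
    pvLineF g i t f i b =
      if g i b then f i b else f i b + pvLineF g i t f i (b - 1) := by
  have hsplit : PySem.List.pyRange 1 t 1 = PySem.List.pyRange 1 b 1 ++ (b :: PySem.List.pyRange (b+1) t 1) := by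
    rw [PySem.List.pyRange_one_append 1 b t hb (by omega), PySem.List.pyRange_one_cons hb2]
  have hfb : pvLineF g i t f i b = (PySem.List.pyRange (b+1) t 1).foldl
      (fun f j => if g i j then f else pvUpd2 f i j (f i j + f i (j - 1)))
      ((fun f j => if g i j then f else pvUpd2 f i j (f i j + f i (j - 1))) (pvLineF g i b f) b) i b := by
    unfold pvLineF
    rw [hsplit, List.foldl_append]
    rfl
  -- the tail of the pass (indices > b) leaves positions ≤ b alone
  have htail : ∀ (f0 : Int → Int → Int) (c : Int), c ≤ b →
      (PySem.List.pyRange (b+1) t 1).foldl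
        (fun f j => if g i j then f else pvUpd2 f i j (f i j + f i (j - 1))) f0 i c = f0 i c := by
    intro f0 c hc
    refine pvFoldInv (fun (f' : Int → Int → Int) => f' i c = f0 i c) _ _ _ rfl ?_
    intro st j hj hC
    have hj' := (PySem.List.mem_pyRange_one).1 hj
    by_cases hg : g i j
    · simp [hg, hC]
    · rw [if_neg hg, pvUpd2_ne]
      · exact hC
      · rintro ⟨-, rfl⟩; omega
  have hfb1 : pvLineF g i b f i b = f i b := pvLineF_outside g i b f i b (by omega)
  by_cases hg : g i b
  · rw [hfb, htail _ b le_rfl]; beta_reduce; rw [if_pos hg, hfb1, if_pos hg]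
  · rw [hfb, htail _ b le_rfl]; beta_reduce; rw [if_neg hg, pvUpd2_self, hfb1, if_neg hg]
    congr 1
    exact (pvLineF_stable g i b t f hb (by omega) i (b - 1) (by omega)).symm

-- A's full forward prefix pass (outer loop over lines, inner loop pvLineF)
def pvFwd (g : Int → Int → Bool) (N M : Int) (u : Int → Int → Int) : Int → Int → Int :=
  (PySem.List.pyRange 0 N 1).foldl (fun f i => pvLineF g i M f) u

theorem pvFwd_outside (g : Int → Int → Bool) (N M : Int) (u : Int → Int → Int)
    (a b : Int) (h : a < 0 ∨ N ≤ a ∨ b < 1 ∨ M ≤ b) : pvFwd g N M u a b = u a b := by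
  unfold pvFwd
  refine pvFoldInv (fun (f' : Int → Int → Int) => f' a b = u a b) _ _ _ rfl ?_
  intro st i hi hC
  have hi' := (PySem.List.mem_pyRange_one).1 hi
  rw [pvLineF_outside g i M st a b (by omega)]
  exact hC

theorem pvFwd_line (g : Int → Int → Bool) (N M : Int) (u : Int → Int → Int)
    (a : Int) (ha : 0 ≤ a) (ha2 : a < N) (b : Int) :
    pvFwd g N M u a b = pvLineF g a M u a b := by
  unfold pvFwd
  rw [show PySem.List.pyRange 0 N 1 = PySem.List.pyRange 0 a 1 ++ (a :: PySem.List.pyRange (a+1) N 1) by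
    rw [PySem.List.pyRange_one_append 0 a N ha (by omega), PySem.List.pyRange_one_cons ha2],
    List.foldl_append, List.foldl_cons]
  -- the lines after a do not touch line a
  have hafter : ∀ (f0 : Int → Int → Int),
      (PySem.List.pyRange (a+1) N 1).foldl (fun f i => pvLineF g i M f) f0 a b = f0 a b := by
    intro f0
    refine pvFoldInv (fun (f' : Int → Int → Int) => f' a b = f0 a b) _ _ _ rfl ?_
    intro st i hi hC
    have hi' := (PySem.List.mem_pyRange_one).1 hi
    rw [pvLineF_outside g i M st a b (by left; omega)]
    exact hC
  rw [hafter]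
  -- the lines before a leave line a at u
  have hbefore : ∀ c, (PySem.List.pyRange 0 a 1).foldl (fun f i => pvLineF g i M f) u a c = u a c := by
    intro c
    refine pvFoldInv (fun (f' : Int → Int → Int) => f' a c = u a c) _ _ _ rfl ?_
    intro st i hi hC
    have hi' := (PySem.List.mem_pyRange_one).1 hi
    rw [pvLineF_outside g i M st a c (by left; omega)]
    exact hC
  exact pvLineF_dep g a _ _ u hbefore b

theorem pvFwd_rec (g : Int → Int → Bool) (N M : Int) (u : Int → Int → Int)
    (a b : Int) (ha : 0 ≤ a) (ha2 : a < N) (hb : 1 ≤ b) (hb2 : b < M) :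
    pvFwd g N M u a b = if g a b then u a b else u a b + pvFwd g N M u a (b - 1) := by
  rw [pvFwd_line g N M u a ha ha2 b, pvLineF_rec g a M u b hb hb2,
      ← pvFwd_line g N M u a ha ha2 (b - 1)]

-- splitting a countdown range
theorem pvRange_neg_append (a b c : Int) (h1 : c ≤ b) (h2 : b ≤ a) :
    PySem.List.pyRange a c (-1) = PySem.List.pyRange a b (-1) ++ PySem.List.pyRange b c (-1) := by
  rw [PySem.List.pyRange_neg_one_eq_reverse, PySem.List.pyRange_neg_one_eq_reverse a b,
      PySem.List.pyRange_neg_one_eq_reverse b c,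
      PySem.List.pyRange_one_append (c+1) (b+1) (a+1) (by omega) (by omega), List.reverse_append]

-- the inner (backward) line pass of A's suffix loops, as a function of the lower bound t
def pvLineB (g : Int → Int → Bool) (i M t : Int) (f : Int → Int → Int) : Int → Int → Int :=
  (PySem.List.pyRange (M - 2) t (-1)).foldl (fun f j => if g i j then f else pvUpd2 f i j (f i j + f i (j + 1))) f

theorem pvLineB_outside (g : Int → Int → Bool) (i M t : Int) (f : Int → Int → Int)
    (a b : Int) (h : a ≠ i ∨ b ≤ t ∨ M - 2 < b) : pvLineB g i M t f a b = f a b := by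
  unfold pvLineB
  refine pvFoldInv (fun (f' : Int → Int → Int) => f' a b = f a b) _ _ _ rfl ?_
  intro st j hj hC
  have hj' := (PySem.List.mem_pyRange_neg_one).1 hj
  by_cases hg : g i j
  · simp [hg, hC]
  · rw [if_neg hg, pvUpd2_ne]
    · exact hC
    · rintro ⟨rfl, rfl⟩
      rcases h with h | h | h
      · exact h rfl
      · omega
      · omega

-- generic: a line pass output on line i depends only on the input's line i
theorem pvLine_dep (g : Int → Int → Bool) (i : Int) (σ : Int → Int) (L : List Int) (f f' : Int → Int → Int)
    (h : ∀ b, f i b = f' i b) :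
    ∀ b, (L.foldl (fun f j => if g i j then f else pvUpd2 f i j (f i j + f i (σ j))) f) i b
       = (L.foldl (fun f j => if g i j then f else pvUpd2 f i j (f i j + f i (σ j))) f') i b := by
  induction L generalizing f f' with
  | nil => exact h
  | cons x t ih =>
      intro b
      apply ih
      intro c
      beta_reduce
      by_cases hg : g i x
      · simp [hg, h]
      · rw [if_neg hg, if_neg hg]
        unfold pvUpd2
        by_cases hc : (i = i ∧ c = x)
        · rw [if_pos hc, if_pos hc, h, h]
        · rw [if_neg hc, if_neg hc, h]

theorem pvLineB_rec (g : Int → Int → Bool) (i M : Int) (f : Int → Int → Int)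
    (b : Int) (hb : 0 ≤ b) (hb2 : b ≤ M - 2) :
    pvLineB g i M (-1) f i b =
      if g i b then f i b else f i b + pvLineB g i M (-1) f i (b + 1) := by
  have hsplit : PySem.List.pyRange (M-2) (-1) (-1)
      = PySem.List.pyRange (M-2) b (-1) ++ (b :: PySem.List.pyRange (b-1) (-1) (-1)) := by
    rw [pvRange_neg_append (M-2) b (-1) (by omega) hb2, show PySem.List.pyRange b (-1) (-1) = b :: PySem.List.pyRange (b-1) (-1) (-1) from PySem.List.pyRange_neg_one_cons (by omega)]
  have hfull : ∀ c, b ≤ c → pvLineB g i M (-1) f i c =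
      ((fun f j => if g i j then f else pvUpd2 f i j (f i j + f i (j + 1))) (pvLineB g i M b f) b) i c := by
    intro c hc
    show (PySem.List.pyRange (M-2) (-1) (-1)).foldl _ f i c = _
    rw [hsplit, List.foldl_append, List.foldl_cons]
    refine pvFoldInv (fun (f' : Int → Int → Int) => f' i c = _) _ _ _ rfl ?_
    intro st j hj hC
    have hj' := (PySem.List.mem_pyRange_neg_one).1 hj
    by_cases hg : g i j
    · simp [hg, hC]
    · rw [if_neg hg, pvUpd2_ne]
      · exact hC
      · rintro ⟨-, rfl⟩; omega
  have hf1b : pvLineB g i M b f i b = f i b := pvLineB_outside g i M b f i b (by omega)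
  by_cases hg : g i b
  · rw [hfull b le_rfl]; beta_reduce; rw [if_pos hg, hf1b, if_pos hg]
  · rw [hfull b le_rfl]; beta_reduce
    rw [if_neg hg, pvUpd2_self, hf1b, if_neg hg]
    congr 1
    rw [hfull (b+1) (by omega)]; beta_reduce
    rw [if_neg hg, pvUpd2_ne]
    rintro ⟨-, h⟩; omega

-- A's full backward suffix pass
def pvBwd (g : Int → Int → Bool) (N M : Int) (u : Int → Int → Int) : Int → Int → Int :=
  (PySem.List.pyRange 0 N 1).foldl (fun f i => pvLineB g i M (-1) f) u

theorem pvBwd_outside (g : Int → Int → Bool) (N M : Int) (u : Int → Int → Int)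
    (a b : Int) (h : a < 0 ∨ N ≤ a ∨ b < 0 ∨ M - 2 < b) : pvBwd g N M u a b = u a b := by
  unfold pvBwd
  refine pvFoldInv (fun (f' : Int → Int → Int) => f' a b = u a b) _ _ _ rfl ?_
  intro st i hi hC
  have hi' := (PySem.List.mem_pyRange_one).1 hi
  rw [pvLineB_outside g i M (-1) st a b (by omega)]
  exact hC

theorem pvBwd_line (g : Int → Int → Bool) (N M : Int) (u : Int → Int → Int)
    (a : Int) (ha : 0 ≤ a) (ha2 : a < N) (b : Int) :
    pvBwd g N M u a b = pvLineB g a M (-1) u a b := by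
  unfold pvBwd
  rw [show PySem.List.pyRange 0 N 1 = PySem.List.pyRange 0 a 1 ++ (a :: PySem.List.pyRange (a+1) N 1) by
    rw [PySem.List.pyRange_one_append 0 a N ha (by omega), PySem.List.pyRange_one_cons ha2],
    List.foldl_append, List.foldl_cons]
  have hafter : ∀ (f0 : Int → Int → Int),
      (PySem.List.pyRange (a+1) N 1).foldl (fun f i => pvLineB g i M (-1) f) f0 a b = f0 a b := by
    intro f0
    refine pvFoldInv (fun (f' : Int → Int → Int) => f' a b = f0 a b) _ _ _ rfl ?_
    intro st i hi hC
    have hi' := (PySem.List.mem_pyRange_one).1 hi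
    rw [pvLineB_outside g i M (-1) st a b (by left; omega)]
    exact hC
  rw [hafter]
  have hbefore : ∀ c, (PySem.List.pyRange 0 a 1).foldl (fun f i => pvLineB g i M (-1) f) u a c = u a c := by
    intro c
    refine pvFoldInv (fun (f' : Int → Int → Int) => f' a c = u a c) _ _ _ rfl ?_
    intro st i hi hC
    have hi' := (PySem.List.mem_pyRange_one).1 hi
    rw [pvLineB_outside g i M (-1) st a c (by left; omega)]
    exact hC
  exact pvLine_dep g a (fun j => j + 1) _ _ u hbefore b

theorem pvBwd_rec (g : Int → Int → Bool) (N M : Int) (u : Int → Int → Int)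
    (a b : Int) (ha : 0 ≤ a) (ha2 : a < N) (hb : 0 ≤ b) (hb2 : b ≤ M - 2) :
    pvBwd g N M u a b = if g a b then u a b else u a b + pvBwd g N M u a (b + 1) := by
  rw [pvBwd_line g N M u a ha ha2 b, pvLineB_rec g a M u b hb hb2,
      ← pvBwd_line g N M u a ha ha2 (b + 1)]

def pvFlip (f : Int → Int → Int) : Int → Int → Int := fun a b => f b a

theorem pvFlip_flip (f : Int → Int → Int) : pvFlip (pvFlip f) = f := rfl

theorem pvFlip_upd2 (f : Int → Int → Int) (i j v : Int) :
    pvFlip (pvUpd2 f i j v) = pvUpd2 (pvFlip f) j i v := by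
  funext a b
  simp only [pvFlip, pvUpd2]
  by_cases h : b = i ∧ a = j
  · rw [if_pos h, if_pos ⟨h.2, h.1⟩]
  · rw [if_neg h, if_neg (by tauto)]

-- a transposed step sequence is the flip of the straight one (generic in the read offset σ)
theorem pvFlip_lineFold (g : Int → Int → Bool) (i : Int) (σ : Int → Int) (L : List Int) (f : Int → Int → Int) :
    L.foldl (fun f j => if g i j then f else pvUpd2 f j i (f j i + f (σ j) i)) f
      = pvFlip (L.foldl (fun f j => if g i j then f else pvUpd2 f i j (f i j + f i (σ j))) (pvFlip f)) := by
  induction L generalizing f with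
  | nil => rfl
  | cons x t ih =>
      rw [List.foldl_cons, List.foldl_cons, ih]
      congr 1
      by_cases hg : g i x
      · simp [hg]
      · beta_reduce
        rw [if_neg hg, if_neg hg, pvFlip_upd2]
        rfl

theorem pvFlip_fwdT (g : Int → Int → Bool) (N M : Int) (u : Int → Int → Int) :
    (PySem.List.pyRange 0 N 1).foldl (fun f i =>
      (PySem.List.pyRange 1 M 1).foldl (fun f j => if g i j then f else pvUpd2 f j i (f j i + f (j - 1) i)) f) u
    = pvFlip (pvFwd g N M (pvFlip u)) := by
  unfold pvFwd pvLineF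
  generalize PySem.List.pyRange 0 N 1 = L
  induction L generalizing u with
  | nil => rfl
  | cons x t ih =>
      rw [List.foldl_cons, List.foldl_cons, ih]
      congr 1
      rw [pvFlip_lineFold g x (fun j => j - 1) _ u, pvFlip_flip]

theorem pvFlip_bwdT (g : Int → Int → Bool) (N M : Int) (u : Int → Int → Int) :
    (PySem.List.pyRange 0 N 1).foldl (fun f i =>
      (PySem.List.pyRange (M - 2) (-1) (-1)).foldl (fun f j => if g i j then f else pvUpd2 f j i (f j i + f (j + 1) i)) f) u
    = pvFlip (pvBwd g N M (pvFlip u)) := by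
  unfold pvBwd pvLineB
  generalize PySem.List.pyRange 0 N 1 = L
  induction L generalizing u with
  | nil => rfl
  | cons x t ih =>
      rw [List.foldl_cons, List.foldl_cons, ih]
      congr 1
      rw [pvFlip_lineFold g x (fun j => j + 1) _ u, pvFlip_flip]

def pvStep (c : String) (r : Int) : Int :=
  if c == "*" then (if c == "." then 0 else r) + 1 else (if c == "." then 0 else r)

def pvRunsGo : List String → Int → List Int
  | [], _ => []
  | c :: t, r => pvStep c r :: pvRunsGo t (pvStep c r)

theorem pvRunsB_go (cs : List String) : pvRunsB cs = pvRunsGo cs 0 := by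
  have aux : ∀ (cs : List String) (acc : List Int) (r : Int),
      (cs.foldl (fun (st : List Int × Int) c =>
        let run := if c == "." then 0 else st.2
        let run := if c == "*" then run + 1 else run
        (st.1 ++ [run], run)) (acc, r)).1 = acc ++ pvRunsGo cs r := by
    intro cs
    induction cs with
    | nil => intro acc r; simp [pvRunsGo]
    | cons c t ih =>
        intro acc r
        rw [List.foldl_cons]
        show (t.foldl _ (acc ++ [pvStep c r], pvStep c r)).1 = _
        rw [ih, pvRunsGo, List.append_assoc]
        rfl
  have := aux cs [] 0
  unfold pvRunsB
  rw [this, List.nil_append]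

theorem pvRunsGo_length (cs : List String) (r : Int) : (pvRunsGo cs r).length = cs.length := by
  induction cs generalizing r with
  | nil => rfl
  | cons c t ih => simp [pvRunsGo, ih]

theorem pvRunsGo_getD (cs : List String) (r : Int) (k : Nat) (hk : k < cs.length) :
    (pvRunsGo cs r).getD k 0
      = pvStep (cs.getD k "") (if k = 0 then r else (pvRunsGo cs r).getD (k - 1) 0) := by
  induction cs generalizing r k with
  | nil => simp at hk
  | cons c t ih =>
      cases k with
      | zero => simp [pvRunsGo]
      | succ k' =>
          cases k' with
          | zero =>
              cases t with
              | nil => simp at hk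
              | cons d t' => simp [pvRunsGo, pvStep]
          | succ k'' =>
              have hk' : k'' + 1 < t.length := by simpa using hk
              have := ih (pvStep c r) (k'' + 1) hk'
              simp only [pvRunsGo, List.getD_cons_succ]
              rw [this]
              simp

theorem pvStep_nonneg (c : String) (r : Int) (h : 0 ≤ r) : 0 ≤ pvStep c r := by
  unfold pvStep; split_ifs <;> omega

theorem pvStep_le (c : String) (r : Int) (h : 0 ≤ r) : pvStep c r ≤ r + 1 := by
  unfold pvStep; split_ifs <;> omega

theorem pvRunsGo_nonneg (cs : List String) (r : Int) (h : 0 ≤ r) (k : Nat) :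
    0 ≤ (pvRunsGo cs r).getD k 0 := by
  induction cs generalizing r k with
  | nil => simp [pvRunsGo]
  | cons c t ih =>
      cases k with
      | zero => simpa [pvRunsGo] using pvStep_nonneg c r h
      | succ k' => simpa [pvRunsGo] using ih (pvStep c r) (pvStep_nonneg c r h) k'

theorem pvRunsGo_le (cs : List String) (r : Int) (h : 0 ≤ r) (k : Nat) :
    (pvRunsGo cs r).getD k 0 ≤ r + k + 1 := by
  induction cs generalizing r k with
  | nil => simp [pvRunsGo]; omega
  | cons c t ih =>
      cases k with
      | zero => simpa [pvRunsGo] using pvStep_le c r h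
      | succ k' =>
          have := ih (pvStep c r) (pvStep_nonneg c r h) k'
          have h2 := pvStep_le c r h
          simp only [pvRunsGo, List.getD_cons_succ]
          push_cast
          omega

-- a function satisfying A's forward prefix recurrence over a line of cells
-- equals B's run-length scan of that line
theorem pvRecEq (M : Int) (cs : List String) (hlen : (cs.length : Int) = M) (F : Int → Int)
    (h0 : 0 < M → F 0 = (if cs.getD 0 "" = "*" then 1 else 0))
    (hrec : ∀ b : Int, 1 ≤ b → b < M →
      F b = if cs.getD b.toNat "" = "." then (if cs.getD b.toNat "" = "*" then 1 else 0)
            else (if cs.getD b.toNat "" = "*" then 1 else 0) + F (b - 1)) :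
    ∀ b : Int, 0 ≤ b → b < M → F b = (pvRunsGo cs 0).getD b.toNat 0 := by
  have main : ∀ k : Nat, (k : Int) < M → F k = (pvRunsGo cs 0).getD k 0 := by
    intro k
    induction k with
    | zero =>
        intro hk
        simp only [Nat.cast_zero]
        rw [pvRunsGo_getD cs 0 0 (by omega), if_pos rfl]
        have := h0 (by exact_mod_cast hk)
        rw [this]
        unfold pvStep
        simp only [beq_iff_eq]
        by_cases h1 : cs.getD 0 "" = "*"
        · rw [if_pos h1, if_pos h1, if_neg (by rw [h1]; decide)]; omega
        · rw [if_neg h1, if_neg h1]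
          split_ifs <;> rfl
    | succ k' ih =>
        intro hk
        have hke : ((k' + 1 : Nat) : Int).toNat = k' + 1 := by simp
        have hr := hrec ((k' + 1 : Nat) : Int) (by exact_mod_cast Nat.succ_le_succ (Nat.zero_le k')) hk
        rw [hke] at hr
        rw [pvRunsGo_getD cs 0 (k' + 1) (by omega), if_neg (Nat.succ_ne_zero k')]
        have ihv := ih (by push_cast at hk ⊢; omega)
        have hcast : ((k' + 1 : Nat) : Int) - 1 = (k' : Int) := by push_cast; ring
        rw [hr, hcast, ihv]
        simp only [Nat.add_sub_cancel]
        unfold pvStep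
        simp only [beq_iff_eq]
        by_cases h1 : cs.getD (k' + 1) "" = "*"
        · rw [if_pos h1, if_pos h1, if_neg (by rw [h1]; decide), if_neg (by rw [h1]; decide)]
          omega
        · rw [if_neg h1, if_neg h1]
          split_ifs <;> omega
  intro b hb hbM
  have : b = ((b.toNat : Nat) : Int) := by omega
  rw [this] at hbM ⊢
  exact main b.toNat hbM



-- ===== init (mark) pass machinery =====
def pvLineM (P : Int → Int → Bool) (i t : Int) (f : Int → Int → Int) : Int → Int → Int :=
  (PySem.List.pyRange 0 t 1).foldl (fun f j => if P i j then pvUpd2 f i j 1 else f) f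

theorem pvLineM_outside (P : Int → Int → Bool) (i t : Int) (f : Int → Int → Int)
    (a b : Int) (h : a ≠ i ∨ b < 0 ∨ t ≤ b) : pvLineM P i t f a b = f a b := by
  unfold pvLineM
  refine pvFoldInv (fun (f' : Int → Int → Int) => f' a b = f a b) _ _ _ rfl ?_
  intro st j hj hC
  have hj' := (PySem.List.mem_pyRange_one).1 hj
  by_cases hg : P i j
  · rw [if_pos hg, pvUpd2_ne]
    · exact hC
    · rintro ⟨rfl, rfl⟩
      rcases h with h | h | h
      · exact h rfl
      · omega
      · omega
  · rw [if_neg hg]; exact hC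

theorem pvLineM_val (P : Int → Int → Bool) (i t : Int) (f : Int → Int → Int)
    (b : Int) (hb : 0 ≤ b) (hb2 : b < t) :
    pvLineM P i t f i b = if P i b then 1 else f i b := by
  have hsplit : PySem.List.pyRange 0 t 1 = PySem.List.pyRange 0 b 1 ++ (b :: PySem.List.pyRange (b+1) t 1) := by
    rw [PySem.List.pyRange_one_append 0 b t hb (by omega), PySem.List.pyRange_one_cons hb2]
  unfold pvLineM
  rw [hsplit, List.foldl_append, List.foldl_cons]
  have htail : ∀ (f0 : Int → Int → Int),
      (PySem.List.pyRange (b+1) t 1).foldl (fun f j => if P i j then pvUpd2 f i j 1 else f) f0 i b = f0 i b := by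
    intro f0
    refine pvFoldInv (fun (f' : Int → Int → Int) => f' i b = f0 i b) _ _ _ rfl ?_
    intro st j hj hC
    have hj' := (PySem.List.mem_pyRange_one).1 hj
    by_cases hg : P i j
    · rw [if_pos hg, pvUpd2_ne]
      · exact hC
      · rintro ⟨-, rfl⟩; omega
    · rw [if_neg hg]; exact hC
  rw [htail]
  have hpre : pvLineM P i b f i b = f i b := pvLineM_outside P i b f i b (by omega)
  by_cases hg : P i b
  · beta_reduce; rw [if_pos hg, if_pos hg, pvUpd2_self]
  · beta_reduce; rw [if_neg hg, if_neg hg]; exact hpre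

def pvMarkF (P : Int → Int → Bool) (N M : Int) (u : Int → Int → Int) : Int → Int → Int :=
  (PySem.List.pyRange 0 N 1).foldl (fun f i => pvLineM P i M f) u

theorem pvMarkF_outside (P : Int → Int → Bool) (N M : Int) (u : Int → Int → Int)
    (a b : Int) (h : a < 0 ∨ N ≤ a ∨ b < 0 ∨ M ≤ b) : pvMarkF P N M u a b = u a b := by
  unfold pvMarkF
  refine pvFoldInv (fun (f' : Int → Int → Int) => f' a b = u a b) _ _ _ rfl ?_
  intro st i hi hC
  have hi' := (PySem.List.mem_pyRange_one).1 hi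
  rw [pvLineM_outside P i M st a b (by omega)]
  exact hC

theorem pvMarkF_val (P : Int → Int → Bool) (N M : Int) (u : Int → Int → Int)
    (a b : Int) (ha : 0 ≤ a) (ha2 : a < N) (hb : 0 ≤ b) (hb2 : b < M) :
    pvMarkF P N M u a b = if P a b then 1 else u a b := by
  unfold pvMarkF
  rw [show PySem.List.pyRange 0 N 1 = PySem.List.pyRange 0 a 1 ++ (a :: PySem.List.pyRange (a+1) N 1) by
    rw [PySem.List.pyRange_one_append 0 a N ha (by omega), PySem.List.pyRange_one_cons ha2],
    List.foldl_append, List.foldl_cons]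
  have hafter : ∀ (f0 : Int → Int → Int),
      (PySem.List.pyRange (a+1) N 1).foldl (fun f i => pvLineM P i M f) f0 a b = f0 a b := by
    intro f0
    refine pvFoldInv (fun (f' : Int → Int → Int) => f' a b = f0 a b) _ _ _ rfl ?_
    intro st i hi hC
    have hi' := (PySem.List.mem_pyRange_one).1 hi
    rw [pvLineM_outside P i M st a b (by left; omega)]
    exact hC
  rw [hafter]
  have hbefore : (PySem.List.pyRange 0 a 1).foldl (fun f i => pvLineM P i M f) u a b = u a b := by
    refine pvFoldInv (fun (f' : Int → Int → Int) => f' a b = u a b) _ _ _ rfl ?_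
    intro st i hi hC
    have hi' := (PySem.List.mem_pyRange_one).1 hi
    rw [pvLineM_outside P i M st a b (by left; omega)]
    exact hC
  rw [pvLineM_val P a M _ b hb hb2]
  by_cases hg : P a b
  · rw [if_pos hg, if_pos hg]
  · rw [if_neg hg, if_neg hg]; exact hbefore

-- ===== projections of product-state folds =====
theorem pvFoldl_fst {α β γ : Type} (L : List α) (f : β × γ → α → β × γ) (g : β → α → β)
    (h : ∀ st x, x ∈ L → (f st x).1 = g st.1 x) : ∀ st, (L.foldl f st).1 = L.foldl g st.1 := by
  induction L with
  | nil => intro st; rfl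
  | cons x t ih =>
      intro st
      rw [List.foldl_cons, List.foldl_cons, ih (fun st y hy => h st y (by simp [hy])) (f st x),
          h st x (by simp)]

-- all four components of the init fold are the mark fold
theorem pvInitA_fst (n m : Int) (l : List (List String)) :
    (pvInitA n m l).1 = pvMarkF (fun i j => pvCellA l i j == "*") n m (fun _ _ => 0) := by
  unfold pvInitA pvMarkF
  refine pvFoldl_fst _ _ _ ?_ _
  intro st i _
  unfold pvLineM
  refine pvFoldl_fst _ _ _ ?_ _
  intro st j _
  by_cases hg : pvCellA l i j == "*"
  · rw [if_pos hg, if_pos hg]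
  · rw [if_neg hg, if_neg hg]

theorem pvInitA_comps (n m : Int) (l : List (List String)) :
    (pvInitA n m l).2.1 = (pvInitA n m l).1 ∧ (pvInitA n m l).2.2.1 = (pvInitA n m l).1 ∧
    (pvInitA n m l).2.2.2 = (pvInitA n m l).1 := by
  unfold pvInitA
  refine pvFoldInv (fun (st : (Int → Int → Int) × (Int → Int → Int) × (Int → Int → Int) × (Int → Int → Int)) =>
    st.2.1 = st.1 ∧ st.2.2.1 = st.1 ∧ st.2.2.2 = st.1) _ _ _ ⟨rfl, rfl, rfl⟩ ?_
  intro st i _ hC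
  refine pvFoldInv (fun (st : (Int → Int → Int) × (Int → Int → Int) × (Int → Int → Int) × (Int → Int → Int)) =>
    st.2.1 = st.1 ∧ st.2.2.1 = st.1 ∧ st.2.2.2 = st.1) _ _ _ hC ?_
  intro st j _ hC
  by_cases hg : pvCellA l i j == "*"
  · rw [if_pos hg]
    exact ⟨by simp [hC.1], by simp [hC.2.1], by simp [hC.2.2]⟩
  · rw [if_neg hg]; exact hC

-- the indicator value of the init arrays
theorem pvInitA_val (n m : Int) (l : List (List String)) (a b : Int) :
    (pvInitA n m l).1 a b =
      if 0 ≤ a ∧ a < n ∧ 0 ≤ b ∧ b < m ∧ pvCellA l a b = "*" then 1 else 0 := by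
  rw [pvInitA_fst]
  by_cases h : 0 ≤ a ∧ a < n ∧ 0 ≤ b ∧ b < m
  · rw [pvMarkF_val _ n m _ a b h.1 h.2.1 h.2.2.1 h.2.2.2]
    by_cases hs : pvCellA l a b = "*"
    · rw [if_pos (by simp [hs]), if_pos (by tauto)]
    · rw [if_neg (by simp [hs]), if_neg (by tauto)]
  · rw [pvMarkF_outside _ n m _ a b (by omega), if_neg (by tauto)]


-- ===== canonical cell lists and their access =====
def pvRowCs (m : Int) (l : List (List String)) (i : Int) : List String :=
  (PySem.List.pyGetD l i []).take m.toNat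

def pvColCs (n : Int) (l : List (List String)) (j : Int) : List String :=
  (PySem.List.pyRange 0 n 1).map (fun i => pvCellA l i j)

theorem pvRow_len (n m : Int) (l : List (List String)) (hlen : n ≤ (l.length : Int))
    (hrows : ∀ r ∈ l.take n.toNat, m ≤ (r.length : Int)) (i : Int) (hi : 0 ≤ i) (hi2 : i < n) :
    m ≤ ((PySem.List.pyGetD l i []).length : Int) := by
  have hidx : i.toNat < l.length := by omega
  rw [PySem.List.pyGetD_of_nonneg l [] hi, List.getD_eq_getElem _ _ hidx]
  refine hrows _ ?_
  have h2 : i.toNat < (l.take n.toNat).length := by rw [List.length_take]; omega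
  have h3 := List.getElem_mem h2
  rwa [List.getElem_take] at h3

theorem pvRowCs_len (n m : Int) (l : List (List String)) (hm : 0 ≤ m) (hlen : n ≤ (l.length : Int))
    (hrows : ∀ r ∈ l.take n.toNat, m ≤ (r.length : Int)) (i : Int) (hi : 0 ≤ i) (hi2 : i < n) :
    ((pvRowCs m l i).length : Int) = m := by
  have := pvRow_len n m l hlen hrows i hi hi2
  unfold pvRowCs
  rw [List.length_take]
  omega

theorem pvRowCs_getD (n m : Int) (l : List (List String)) (hlen : n ≤ (l.length : Int))
    (hrows : ∀ r ∈ l.take n.toNat, m ≤ (r.length : Int)) (i : Int) (hi : 0 ≤ i) (hi2 : i < n)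
    (k : Int) (hk : 0 ≤ k) (hk2 : k < m) :
    (pvRowCs m l i).getD k.toNat "" = pvCellA l i k := by
  have hrl := pvRow_len n m l hlen hrows i hi hi2
  unfold pvRowCs pvCellA
  rw [PySem.List.pyGetD_of_nonneg _ "" hk]
  rw [List.getD_eq_getElem?_getD, List.getElem?_take_of_lt (by omega), ← List.getD_eq_getElem?_getD]

theorem pvColCs_len (n : Int) (l : List (List String)) (hn : 0 ≤ n) (j : Int) :
    ((pvColCs n l j).length : Int) = n := by
  unfold pvColCs
  rw [List.length_map, PySem.List.length_pyRange_one]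
  omega

theorem pvColCs_getD (n : Int) (l : List (List String)) (j : Int)
    (k : Int) (hk : 0 ≤ k) (hk2 : k < n) :
    (pvColCs n l j).getD k.toNat "" = pvCellA l k j := by
  unfold pvColCs
  have hkl : k.toNat < ((PySem.List.pyRange 0 n 1).map (fun i => pvCellA l i j)).length := by
    rw [List.length_map, PySem.List.length_pyRange_one]; omega
  rw [List.getD_eq_getElem _ _ hkl, List.getElem_map, PySem.List.getElem_pyRange_one]
  norm_num
  congr 1
  omega

theorem pvRevGetD {α : Type} (cs : List α) (d : α) (k : Nat) (hk : k < cs.length) :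
    cs.reverse.getD k d = cs.getD (cs.length - 1 - k) d := by
  rw [List.getD_eq_getElem _ _ (by simpa using hk), List.getElem_reverse,
      List.getD_eq_getElem _ _ (by omega)]

-- ===== values of A's four reach arrays =====
theorem pvRowsumA_val (n m : Int) (l : List (List String)) (hn : 0 < n) (hm : 0 < m)
    (hlen : n ≤ (l.length : Int)) (hrows : ∀ r ∈ l.take n.toNat, m ≤ (r.length : Int))
    (i j : Int) (hi : 0 ≤ i) (hi2 : i < n) (hj : 0 ≤ j) (hj2 : j < m) :
    pvRowsumA n m l i j = (pvRunsGo (pvRowCs m l i) 0).getD j.toNat 0 := by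
  have hdef : pvRowsumA n m l = pvFwd (fun i j => pvCellA l i j == ".") n m (pvInitA n m l).1 := rfl
  rw [hdef]
  refine pvRecEq m (pvRowCs m l i) (pvRowCs_len n m l (by omega) hlen hrows i hi hi2)
    (fun b => pvFwd (fun i j => pvCellA l i j == ".") n m (pvInitA n m l).1 i b) ?_ ?_ j hj hj2
  · intro _
    beta_reduce
    have hc := pvRowCs_getD n m l hlen hrows i hi hi2 0 le_rfl hm
    rw [Int.toNat_zero] at hc
    rw [pvFwd_outside _ n m _ i 0 (by omega), pvInitA_val, hc]
    by_cases hs : pvCellA l i 0 = "*"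
    · rw [if_pos ⟨hi, hi2, le_rfl, hm, hs⟩, if_pos hs]
    · rw [if_neg (fun hh => hs hh.2.2.2.2), if_neg hs]
  · intro b hb hb2
    beta_reduce
    rw [pvFwd_rec _ n m _ i b hi hi2 hb hb2, pvInitA_val,
        show (pvRowCs m l i).getD b.toNat "" = pvCellA l i b from
          pvRowCs_getD n m l hlen hrows i hi hi2 b (by omega) hb2]
    have hQ : (if 0 ≤ i ∧ i < n ∧ 0 ≤ b ∧ b < m ∧ pvCellA l i b = "*" then (1:Int) else 0)
        = (if pvCellA l i b = "*" then 1 else 0) := by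
      by_cases hs : pvCellA l i b = "*"
      · rw [if_pos ⟨hi, hi2, by omega, hb2, hs⟩, if_pos hs]
      · rw [if_neg (fun hh => hs hh.2.2.2.2), if_neg hs]
    rw [hQ]
    by_cases hd : pvCellA l i b = "."
    · rw [if_pos (by simp [hd]), if_pos hd]
    · rw [if_neg (by simp [hd]), if_neg hd]


theorem pvRowA_val (n m : Int) (l : List (List String)) (hn : 0 < n) (hm : 0 < m)
    (hlen : n ≤ (l.length : Int)) (hrows : ∀ r ∈ l.take n.toNat, m ≤ (r.length : Int))
    (i j : Int) (hi : 0 ≤ i) (hi2 : i < n) (hj : 0 ≤ j) (hj2 : j < m) :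
    pvRowA n m l i j = (pvRunsGo (pvRowCs m l i).reverse 0).getD (m - 1 - j).toNat 0 := by
  have hcomps := pvInitA_comps n m l
  have hdef : pvRowA n m l = pvBwd (fun i j => pvCellA l i j == ".") n m (pvInitA n m l).1 := by
    show pvBwd (fun i j => pvCellA l i j == ".") n m (pvInitA n m l).2.2.1 = _
    rw [hcomps.2.1]
  have hcslen : ((pvRowCs m l i).reverse.length : Int) = m := by
    rw [List.length_reverse]; exact pvRowCs_len n m l (by omega) hlen hrows i hi hi2
  have hL : (pvRowCs m l i).length = m.toNat := by
    have := pvRowCs_len n m l (by omega) hlen hrows i hi hi2; omega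
  have hcs : ∀ k : Int, 0 ≤ k → k < m →
      (pvRowCs m l i).reverse.getD k.toNat "" = pvCellA l i (m - 1 - k) := by
    intro k hk hk2
    rw [pvRevGetD _ "" k.toNat (by omega),
        show (pvRowCs m l i).length - 1 - k.toNat = (m - 1 - k).toNat by omega]
    exact pvRowCs_getD n m l hlen hrows i hi hi2 (m - 1 - k) (by omega) (by omega)
  rw [hdef]
  have main := pvRecEq m (pvRowCs m l i).reverse hcslen
    (fun k => pvBwd (fun i j => pvCellA l i j == ".") n m (pvInitA n m l).1 i (m - 1 - k)) ?_ ?_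
    (m - 1 - j) (by omega) (by omega)
  · beta_reduce at main
    rw [show m - 1 - (m - 1 - j) = j by ring] at main
    exact main
  · intro _
    beta_reduce
    have hc := hcs 0 le_rfl hm
    rw [Int.toNat_zero] at hc
    rw [show m - 1 - (0:Int) = m - 1 by ring] at hc
    rw [show m - 1 - (0:Int) = m - 1 by ring, pvBwd_outside _ n m _ i (m-1) (by omega),
        pvInitA_val, hc]
    by_cases hs : pvCellA l i (m-1) = "*"
    · rw [if_pos ⟨hi, hi2, by omega, by omega, hs⟩, if_pos hs]
    · rw [if_neg (fun hh => hs hh.2.2.2.2), if_neg hs]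
  · intro k hk hk2
    beta_reduce
    rw [pvBwd_rec _ n m _ i (m - 1 - k) hi hi2 (by omega) (by omega), pvInitA_val,
        show m - 1 - k + 1 = m - 1 - (k - 1) by ring, hcs k (by omega) hk2]
    have hQ : (if 0 ≤ i ∧ i < n ∧ 0 ≤ m - 1 - k ∧ m - 1 - k < m ∧ pvCellA l i (m - 1 - k) = "*" then (1:Int) else 0)
        = (if pvCellA l i (m - 1 - k) = "*" then 1 else 0) := by
      by_cases hs : pvCellA l i (m - 1 - k) = "*"
      · rw [if_pos ⟨hi, hi2, by omega, by omega, hs⟩, if_pos hs]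
      · rw [if_neg (fun hh => hs hh.2.2.2.2), if_neg hs]
    rw [hQ]
    by_cases hd : pvCellA l i (m - 1 - k) = "."
    · rw [if_pos (by simp [hd]), if_pos hd]
    · rw [if_neg (by simp [hd]), if_neg hd]

theorem pvColsumA_val (n m : Int) (l : List (List String)) (hn : 0 < n) (hm : 0 < m)
    (hlen : n ≤ (l.length : Int)) (hrows : ∀ r ∈ l.take n.toNat, m ≤ (r.length : Int))
    (i j : Int) (hi : 0 ≤ i) (hi2 : i < n) (hj : 0 ≤ j) (hj2 : j < m) :
    pvColsumA n m l i j = (pvRunsGo (pvColCs n l j) 0).getD i.toNat 0 := by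
  have hcomps := pvInitA_comps n m l
  have hdef : pvColsumA n m l
      = pvFlip (pvFwd (fun i j => pvCellA l j i == ".") m n (pvFlip (pvInitA n m l).2.1)) :=
    pvFlip_fwdT _ m n _
  have hflipQ : pvFlip (pvInitA n m l).2.1 = pvFlip (pvInitA n m l).1 := by rw [hcomps.1]
  rw [hdef, hflipQ]
  show pvFwd (fun i j => pvCellA l j i == ".") m n (pvFlip (pvInitA n m l).1) j i = _
  refine pvRecEq n (pvColCs n l j) (pvColCs_len n l (by omega) j)
    (fun b => pvFwd (fun i j => pvCellA l j i == ".") m n (pvFlip (pvInitA n m l).1) j b) ?_ ?_ i hi hi2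
  · intro _
    beta_reduce
    have hc := pvColCs_getD n l j 0 le_rfl hn
    rw [Int.toNat_zero] at hc
    rw [pvFwd_outside _ m n _ j 0 (by omega)]
    show (pvInitA n m l).1 0 j = _
    rw [pvInitA_val, hc]
    by_cases hs : pvCellA l 0 j = "*"
    · rw [if_pos ⟨le_rfl, hn, hj, hj2, hs⟩, if_pos hs]
    · rw [if_neg (fun hh => hs hh.2.2.2.2), if_neg hs]
  · intro b hb hb2
    beta_reduce
    rw [pvFwd_rec _ m n _ j b hj hj2 hb hb2]
    have hQ : pvFlip (pvInitA n m l).1 j b = (if pvCellA l b j = "*" then (1:Int) else 0) := by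
      show (pvInitA n m l).1 b j = _
      rw [pvInitA_val]
      by_cases hs : pvCellA l b j = "*"
      · rw [if_pos ⟨by omega, by omega, hj, hj2, hs⟩, if_pos hs]
      · rw [if_neg (fun hh => hs hh.2.2.2.2), if_neg hs]
    rw [hQ, pvColCs_getD n l j b (by omega) hb2]
    by_cases hd : pvCellA l b j = "."
    · rw [if_pos (by simp [hd]), if_pos hd]
    · rw [if_neg (by simp [hd]), if_neg hd]

theorem pvColA_val (n m : Int) (l : List (List String)) (hn : 0 < n) (hm : 0 < m)
    (hlen : n ≤ (l.length : Int)) (hrows : ∀ r ∈ l.take n.toNat, m ≤ (r.length : Int))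
    (i j : Int) (hi : 0 ≤ i) (hi2 : i < n) (hj : 0 ≤ j) (hj2 : j < m) :
    pvColA n m l i j = (pvRunsGo (pvColCs n l j).reverse 0).getD (n - 1 - i).toNat 0 := by
  have hcomps := pvInitA_comps n m l
  have hdef : pvColA n m l
      = pvFlip (pvBwd (fun i j => pvCellA l j i == ".") m n (pvFlip (pvInitA n m l).2.2.2)) :=
    pvFlip_bwdT _ m n _
  have hflipQ : pvFlip (pvInitA n m l).2.2.2 = pvFlip (pvInitA n m l).1 := by rw [hcomps.2.2]
  rw [hdef, hflipQ]
  show pvBwd (fun i j => pvCellA l j i == ".") m n (pvFlip (pvInitA n m l).1) j i = _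
  have hcslen : ((pvColCs n l j).reverse.length : Int) = n := by
    rw [List.length_reverse]; exact pvColCs_len n l (by omega) j
  have hcs : ∀ k : Int, 0 ≤ k → k < n →
      (pvColCs n l j).reverse.getD k.toNat "" = pvCellA l (n - 1 - k) j := by
    intro k hk hk2
    have hlen2 : (pvColCs n l j).length = n.toNat := by
      have := pvColCs_len n l (by omega) j; omega
    rw [show ((pvColCs n l j).reverse.getD k.toNat "")
        = ((pvColCs n l j).getD ((pvColCs n l j).length - 1 - k.toNat) "") from
        pvRevGetD _ "" k.toNat (by omega),
        show (pvColCs n l j).length - 1 - k.toNat = (n - 1 - k).toNat by omega]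
    exact pvColCs_getD n l j (n - 1 - k) (by omega) (by omega)
  have main := pvRecEq n (pvColCs n l j).reverse hcslen
    (fun k => pvBwd (fun i j => pvCellA l j i == ".") m n (pvFlip (pvInitA n m l).1) j (n - 1 - k)) ?_ ?_
    (n - 1 - i) (by omega) (by omega)
  · beta_reduce at main
    rw [show n - 1 - (n - 1 - i) = i by ring] at main
    exact main
  · intro _
    beta_reduce
    have hc := hcs 0 le_rfl hn
    rw [Int.toNat_zero] at hc
    rw [show n - 1 - (0:Int) = n - 1 by ring] at hc
    rw [show n - 1 - (0:Int) = n - 1 by ring, pvBwd_outside _ m n _ j (n-1) (by omega)]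
    show (pvInitA n m l).1 (n-1) j = _
    rw [pvInitA_val, hc]
    by_cases hs : pvCellA l (n-1) j = "*"
    · rw [if_pos ⟨by omega, by omega, hj, hj2, hs⟩, if_pos hs]
    · rw [if_neg (fun hh => hs hh.2.2.2.2), if_neg hs]
  · intro k hk hk2
    beta_reduce
    rw [pvBwd_rec _ m n _ j (n - 1 - k) hj hj2 (by omega) (by omega),
        show n - 1 - k + 1 = n - 1 - (k - 1) by ring, hcs k (by omega) hk2]
    have hQ : pvFlip (pvInitA n m l).1 j (n - 1 - k) = (if pvCellA l (n - 1 - k) j = "*" then (1:Int) else 0) := by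
      show (pvInitA n m l).1 (n - 1 - k) j = _
      rw [pvInitA_val]
      by_cases hs : pvCellA l (n - 1 - k) j = "*"
      · rw [if_pos ⟨by omega, by omega, hj, hj2, hs⟩, if_pos hs]
      · rw [if_neg (fun hh => hs hh.2.2.2.2), if_neg hs]
    rw [hQ]
    by_cases hd : pvCellA l (n - 1 - k) j = "."
    · rw [if_pos (by simp [hd]), if_pos hd]
    · rw [if_neg (by simp [hd]), if_neg hd]


-- ===== canonical arm values, coverage indicators, canonical tot =====
def pvLeftV (m : Int) (l : List (List String)) (i j : Int) : Int :=
  (pvRunsGo (pvRowCs m l i) 0).getD j.toNat 0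
def pvRightV (m : Int) (l : List (List String)) (i j : Int) : Int :=
  (pvRunsGo (pvRowCs m l i).reverse 0).getD (m - 1 - j).toNat 0
def pvUpV (n : Int) (l : List (List String)) (i j : Int) : Int :=
  (pvRunsGo (pvColCs n l j) 0).getD i.toNat 0
def pvDownV (n : Int) (l : List (List String)) (i j : Int) : Int :=
  (pvRunsGo (pvColCs n l j).reverse 0).getD (n - 1 - i).toNat 0

def pvArm (n m : Int) (l : List (List String)) (i j : Int) : Int :=
  min (min (min (pvLeftV m l i j) (pvRightV m l i j)) (pvUpV n l i j)) (pvDownV n l i j) - 1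

def pvTotC (n m : Int) (l : List (List String)) : List (List Int) :=
  (PySem.List.pyRange 0 n 1).foldl (fun t i =>
    (PySem.List.pyRange 0 m 1).foldl (fun t j =>
      if pvCellA l i j = "*" ∧ 0 < pvArm n m l i j then
        t ++ [[i + 1, j + 1, pvArm n m l i j]] else t) t) []

def pvEntryOK (n m : Int) (e : List Int) : Prop :=
  ∃ i j a1 : Int, e = [i + 1, j + 1, a1] ∧ 0 ≤ i ∧ i < n ∧ 0 ≤ j ∧ j < m ∧
    1 ≤ a1 ∧ a1 ≤ j ∧ a1 + j ≤ m - 1 ∧ a1 ≤ i ∧ a1 + i ≤ n - 1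

def pvDh (a b : Int) (e : List Int) : Int :=
  match e with
  | [r, c, a1] => (if a = r - 1 ∧ b = c - 1 - a1 then 1 else 0)
                - (if a = r - 1 ∧ b = c - 1 + a1 + 1 then 1 else 0)
  | _ => 0

def pvDv (a b : Int) (e : List Int) : Int :=
  match e with
  | [r, c, a1] => (if b = c - 1 ∧ a = r - 1 - a1 then 1 else 0)
                - (if b = c - 1 ∧ a = r - 1 + a1 + 1 then 1 else 0)
  | _ => 0

def pvHCov (a b : Int) (e : List Int) : Int :=
  match e with
  | [r, c, a1] => if r - 1 = a ∧ |b - (c - 1)| ≤ a1 then 1 else 0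
  | _ => 0

def pvVCov (a b : Int) (e : List Int) : Int :=
  match e with
  | [r, c, a1] => if c - 1 = b ∧ |a - (r - 1)| ≤ a1 then 1 else 0
  | _ => 0

-- run value at a star cell is at least 1
theorem pvRunsGo_star (cs : List String) (k : Nat) (hk : k < cs.length)
    (hstar : cs.getD k "" = "*") : 1 ≤ (pvRunsGo cs 0).getD k 0 := by
  rw [pvRunsGo_getD cs 0 k hk, hstar]
  have : (0:Int) ≤ (if k = 0 then (0:Int) else (pvRunsGo cs 0).getD (k-1) 0) := by
    by_cases h : k = 0
    · rw [if_pos h]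
    · rw [if_neg h]; exact pvRunsGo_nonneg cs 0 le_rfl (k-1)
  unfold pvStep
  rw [if_pos (by decide), if_neg (by decide)]
  omega

-- at an in-range star cell the arm is in [0, …] with the four boundary bounds
theorem pvArm_star (n m : Int) (l : List (List String)) (hn : 0 < n) (hm : 0 < m)
    (hlen : n ≤ (l.length : Int)) (hrows : ∀ r ∈ l.take n.toNat, m ≤ (r.length : Int))
    (i j : Int) (hi : 0 ≤ i) (hi2 : i < n) (hj : 0 ≤ j) (hj2 : j < m)
    (hstar : pvCellA l i j = "*") :
    0 ≤ pvArm n m l i j ∧ pvArm n m l i j ≤ j ∧ pvArm n m l i j + j ≤ m - 1 ∧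
    pvArm n m l i j ≤ i ∧ pvArm n m l i j + i ≤ n - 1 := by
  have hLrow : (pvRowCs m l i).length = m.toNat := by
    have := pvRowCs_len n m l (by omega) hlen hrows i hi hi2; omega
  have hLcol : (pvColCs n l j).length = n.toNat := by
    have := pvColCs_len n l (by omega) j; omega
  -- the four values are ≥ 1 at a star and bounded by the distance to the border
  have hleft1 : 1 ≤ pvLeftV m l i j := by
    refine pvRunsGo_star _ j.toNat (by omega) ?_
    rw [pvRowCs_getD n m l hlen hrows i hi hi2 j hj hj2]; exact hstar
  have hleftB : pvLeftV m l i j ≤ j + 1 := by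
    have := pvRunsGo_le (pvRowCs m l i) 0 le_rfl j.toNat
    unfold pvLeftV; omega
  have hright1 : 1 ≤ pvRightV m l i j := by
    refine pvRunsGo_star _ (m - 1 - j).toNat (by simp [hLrow]; omega) ?_
    rw [pvRevGetD _ "" (m-1-j).toNat (by omega), hLrow,
        show m.toNat - 1 - (m - 1 - j).toNat = j.toNat by omega,
        pvRowCs_getD n m l hlen hrows i hi hi2 j hj hj2]
    exact hstar
  have hrightB : pvRightV m l i j ≤ m - j := by
    have := pvRunsGo_le (pvRowCs m l i).reverse 0 le_rfl (m - 1 - j).toNat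
    unfold pvRightV; omega
  have hup1 : 1 ≤ pvUpV n l i j := by
    refine pvRunsGo_star _ i.toNat (by omega) ?_
    rw [pvColCs_getD n l j i hi hi2]; exact hstar
  have hupB : pvUpV n l i j ≤ i + 1 := by
    have := pvRunsGo_le (pvColCs n l j) 0 le_rfl i.toNat
    unfold pvUpV; omega
  have hdown1 : 1 ≤ pvDownV n l i j := by
    refine pvRunsGo_star _ (n - 1 - i).toNat (by simp [hLcol]; omega) ?_
    rw [pvRevGetD _ "" (n-1-i).toNat (by omega), hLcol,
        show n.toNat - 1 - (n - 1 - i).toNat = i.toNat by omega,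
        pvColCs_getD n l j i hi hi2]
    exact hstar
  have hdownB : pvDownV n l i j ≤ n - i := by
    have := pvRunsGo_le (pvColCs n l j).reverse 0 le_rfl (n - 1 - i).toNat
    unfold pvDownV; omega
  unfold pvArm
  constructor
  · simp only [le_min_iff] at *
    omega
  refine ⟨?_, ?_, ?_, ?_⟩ <;>
    · have h1 : min (min (min (pvLeftV m l i j) (pvRightV m l i j)) (pvUpV n l i j)) (pvDownV n l i j)
          ≤ pvLeftV m l i j := le_trans (min_le_left _ _) (le_trans (min_le_left _ _) (min_le_left _ _))
      have h2 : min (min (min (pvLeftV m l i j) (pvRightV m l i j)) (pvUpV n l i j)) (pvDownV n l i j)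
          ≤ pvRightV m l i j := le_trans (min_le_left _ _) (le_trans (min_le_left _ _) (min_le_right _ _))
      have h3 : min (min (min (pvLeftV m l i j) (pvRightV m l i j)) (pvUpV n l i j)) (pvDownV n l i j)
          ≤ pvUpV n l i j := le_trans (min_le_left _ _) (min_le_right _ _)
      have h4 : min (min (min (pvLeftV m l i j) (pvRightV m l i j)) (pvUpV n l i j)) (pvDownV n l i j)
          ≤ pvDownV n l i j := min_le_right _ _
      omega

-- A's check at an in-range cell computes the canonical arm
theorem pvCheckA_val (n m : Int) (l : List (List String)) (hn : 0 < n) (hm : 0 < m)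
    (hlen : n ≤ (l.length : Int)) (hrows : ∀ r ∈ l.take n.toNat, m ≤ (r.length : Int))
    (i j : Int) (hi : 0 ≤ i) (hi2 : i < n) (hj : 0 ≤ j) (hj2 : j < m) :
    pvCheckA n m l i j = if pvArm n m l i j = 0 then [] else [pvArm n m l i j] := by
  unfold pvCheckA
  rw [pvRowA_val n m l hn hm hlen hrows i j hi hi2 hj hj2,
      pvRowsumA_val n m l hn hm hlen hrows i j hi hi2 hj hj2,
      pvColsumA_val n m l hn hm hlen hrows i j hi hi2 hj hj2,
      pvColA_val n m l hn hm hlen hrows i j hi hi2 hj hj2]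
  have harm : (pvRunsGo (pvRowCs m l i).reverse 0).getD (m - 1 - j).toNat 0
      = pvRightV m l i j := rfl
  have harm2 : min (min (min (pvRightV m l i j) (pvLeftV m l i j)) (pvUpV n l i j)) (pvDownV n l i j) - 1
      = pvArm n m l i j := by
    unfold pvArm
    rw [min_comm (pvRightV m l i j) (pvLeftV m l i j)]
  show (if (min (min (min (pvRightV m l i j) (pvLeftV m l i j)) (pvUpV n l i j)) (pvDownV n l i j) - 1 == 0) = true
      then ([] : List Int) else [min (min (min (pvRightV m l i j) (pvLeftV m l i j)) (pvUpV n l i j)) (pvDownV n l i j) - 1])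
      = _
  rw [harm2]
  by_cases hz : pvArm n m l i j = 0
  · rw [if_pos (by simp [hz]), if_pos hz]
  · rw [if_neg (by simp [hz]), if_neg hz]


-- combined effect of the two sequential ±1 marks in a row of h
theorem pvUpd2_delta (h : Int → Int → Int) (i y y' a b : Int) (hne : y ≠ y') :
    pvUpd2 (pvUpd2 h i y (h i y + 1)) i y' ((pvUpd2 h i y (h i y + 1)) i y' - 1) a b
      = h a b + ((if a = i ∧ b = y then 1 else 0) - (if a = i ∧ b = y' then 1 else 0)) := by
  unfold pvUpd2
  split_ifs <;> simp_all <;> omega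

theorem pvUpd2_deltaT (v : Int → Int → Int) (j x x' a b : Int) (hne : x ≠ x') :
    pvUpd2 (pvUpd2 v x j (v x j + 1)) x' j ((pvUpd2 v x j (v x j + 1)) x' j - 1) a b
      = v a b + ((if b = j ∧ a = x then 1 else 0) - (if b = j ∧ a = x' then 1 else 0)) := by
  unfold pvUpd2
  split_ifs <;> simp_all <;> omega

-- the tot list A collects is the canonical tot
theorem pvStarsA_fst (n m : Int) (l : List (List String)) (hn : 0 < n) (hm : 0 < m)
    (hlen : n ≤ (l.length : Int)) (hrows : ∀ r ∈ l.take n.toNat, m ≤ (r.length : Int)) :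
    (pvStarsA n m l).1 = pvTotC n m l := by
  unfold pvStarsA pvTotC
  refine pvFoldl_fst _ _ _ ?_ _
  intro st i hi
  have hi' := (PySem.List.mem_pyRange_one).1 hi
  refine pvFoldl_fst _ _ _ ?_ _
  intro st j hj
  have hj' := (PySem.List.mem_pyRange_one).1 hj
  by_cases hs : pvCellA l i j = "*"
  · rw [if_pos (by simp [hs]), pvCheckA_val n m l hn hm hlen hrows i j (by omega) (by omega) (by omega) (by omega)]
    have harm := pvArm_star n m l hn hm hlen hrows i j (by omega) (by omega) (by omega) (by omega) hs
    by_cases hz : pvArm n m l i j = 0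
    · rw [if_pos hz, if_neg (by rintro ⟨-, h0⟩; omega)]
      rfl
    · rw [if_neg hz, if_pos ⟨hs, by omega⟩]
      rfl
  · rw [if_neg (by simp [hs]), if_neg (by rintro ⟨h0, -⟩; exact hs h0)]

-- every canonical tot entry is well formed and in range
theorem pvTotC_entries (n m : Int) (l : List (List String)) (hn : 0 < n) (hm : 0 < m)
    (hlen : n ≤ (l.length : Int)) (hrows : ∀ r ∈ l.take n.toNat, m ≤ (r.length : Int)) :
    ∀ e ∈ pvTotC n m l, pvEntryOK n m e := by
  unfold pvTotC
  refine pvFoldInv (fun (t : List (List Int)) => ∀ e ∈ t, pvEntryOK n m e) _ _ _ (by simp) ?_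
  intro st i hi hC
  have hi' := (PySem.List.mem_pyRange_one).1 hi
  refine pvFoldInv (fun (t : List (List Int)) => ∀ e ∈ t, pvEntryOK n m e) _ _ _ hC ?_
  intro st j hj hC
  have hj' := (PySem.List.mem_pyRange_one).1 hj
  by_cases hc : pvCellA l i j = "*" ∧ 0 < pvArm n m l i j
  · rw [if_pos hc]
    intro e he
    rcases List.mem_append.1 he with he | he
    · exact hC e he
    · have harm := pvArm_star n m l hn hm hlen hrows i j (by omega) (by omega) (by omega) (by omega) hc.1
      rw [List.mem_singleton.1 he]
      exact ⟨i, j, pvArm n m l i j, rfl, by omega, by omega, by omega, by omega,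
        by omega, by omega, by omega, by omega, by omega⟩
  · rw [if_neg hc]
    exact hC

-- A's h and v difference arrays are the sums of per-entry deltas over tot
theorem pvStarsA_hv (n m : Int) (l : List (List String)) (hn : 0 < n) (hm : 0 < m)
    (hlen : n ≤ (l.length : Int)) (hrows : ∀ r ∈ l.take n.toNat, m ≤ (r.length : Int)) :
    ∀ a b, (pvStarsA n m l).2.1 a b = (((pvStarsA n m l).1).map (pvDh a b)).sum ∧
           (pvStarsA n m l).2.2 a b = (((pvStarsA n m l).1).map (pvDv a b)).sum := by
  unfold pvStarsA
  refine pvFoldInv (fun (st : List (List Int) × (Int → Int → Int) × (Int → Int → Int)) =>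
    ∀ a b, st.2.1 a b = ((st.1).map (pvDh a b)).sum ∧ st.2.2 a b = ((st.1).map (pvDv a b)).sum)
    _ _ _ (fun a b => ⟨rfl, rfl⟩) ?_
  intro st i hi hC
  have hi' := (PySem.List.mem_pyRange_one).1 hi
  refine pvFoldInv (fun (st : List (List Int) × (Int → Int → Int) × (Int → Int → Int)) =>
    ∀ a b, st.2.1 a b = ((st.1).map (pvDh a b)).sum ∧ st.2.2 a b = ((st.1).map (pvDv a b)).sum)
    _ _ _ hC ?_
  intro st j hj hC
  have hj' := (PySem.List.mem_pyRange_one).1 hj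
  by_cases hs : pvCellA l i j = "*"
  · rw [if_pos (by simp [hs]), pvCheckA_val n m l hn hm hlen hrows i j (by omega) (by omega) (by omega) (by omega)]
    have harm := pvArm_star n m l hn hm hlen hrows i j (by omega) (by omega) (by omega) (by omega) hs
    by_cases hz : pvArm n m l i j = 0
    · rw [if_pos hz]
      exact hC
    · rw [if_neg hz]
      rw [List.foldl_cons, List.foldl_nil]
      intro a b
      show (pvUpd2 (pvUpd2 st.2.1 i (j - pvArm n m l i j) _) i (j + pvArm n m l i j + 1) _ a b
          = ((st.1 ++ [[i + 1, j + 1, pvArm n m l i j]]).map (pvDh a b)).sum) ∧ _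
      constructor
      · rw [pvUpd2_delta st.2.1 i (j - pvArm n m l i j) (j + pvArm n m l i j + 1) a b (by omega),
            List.map_append, List.sum_append, (hC a b).1]
        have e1 : i + 1 - 1 = i := by ring
        have e2 : j + 1 - 1 - pvArm n m l i j = j - pvArm n m l i j := by ring
        have e3 : j + 1 - 1 + pvArm n m l i j + 1 = j + pvArm n m l i j + 1 := by ring
        simp only [pvDh, List.map_cons, List.map_nil, List.sum_cons, List.sum_nil, e1, e2, e3]
        omega
      · show pvUpd2 (pvUpd2 st.2.2 (i - pvArm n m l i j) j _) (i + pvArm n m l i j + 1) j _ a b = _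
        rw [pvUpd2_deltaT st.2.2 j (i - pvArm n m l i j) (i + pvArm n m l i j + 1) a b (by omega),
            List.map_append, List.sum_append, (hC a b).2]
        have e1 : i + 1 - 1 - pvArm n m l i j = i - pvArm n m l i j := by ring
        have e2 : j + 1 - 1 = j := by ring
        have e3 : i + 1 - 1 + pvArm n m l i j + 1 = i + pvArm n m l i j + 1 := by ring
        simp only [pvDv, List.map_cons, List.map_nil, List.sum_cons, List.sum_nil, e1, e2, e3]
        omega
  · rw [if_neg (by simp [hs])]
    exact hC


-- A's accumulation passes, seen as the guardless forward pass
theorem pvHA_fwd (n m : Int) (l : List (List String)) :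
    pvHA n m l = pvFwd (fun _ _ => false) n m (pvStarsA n m l).2.1 := rfl

theorem pvVA_fwd (n m : Int) (l : List (List String)) :
    pvVA n m l = pvFlip (pvFwd (fun _ _ => false) m n (pvFlip (pvStarsA n m l).2.2)) :=
  pvFlip_fwdT (fun _ _ => false) m n (pvStarsA n m l).2.2

-- sums over the entry list
theorem pvSum_sub (T : List (List Int)) (f g : List Int → Int) :
    (T.map (fun e => f e - g e)).sum = (T.map f).sum - (T.map g).sum := by
  induction T with
  | nil => simp
  | cons e t ih => simp only [List.map_cons, List.sum_cons, ih]; ring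

theorem pvSum_zero_iff (T : List (List Int)) (f : List Int → Int) (h : ∀ e ∈ T, 0 ≤ f e) :
    ((T.map f).sum = 0 ↔ ∀ e ∈ T, f e = 0) := by
  induction T with
  | nil => simp
  | cons e t ih =>
      have h0 := h e (by simp)
      have ht : ∀ e ∈ t, 0 ≤ f e := fun e he => h e (by simp [he])
      have hs : 0 ≤ (t.map f).sum := by
        clear ih h0 h; induction t with
        | nil => simp
        | cons x s ihs =>
            have := ht x (by simp)
            have hx : ∀ e ∈ s, 0 ≤ f e := fun e he => ht e (by simp [he])
            simp only [List.map_cons, List.sum_cons]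
            have := ihs hx
            omega
      simp only [List.map_cons, List.sum_cons, List.mem_cons]
      constructor
      · intro hz
        have hfe : f e = 0 := by
          have := (ih ht)
          omega
        refine fun e' he' => he'.elim (fun hh => hh ▸ hfe) (fun hh => ((ih ht).1 (by omega)) e' hh)
      · intro hall
        rw [hall e (Or.inl rfl), (ih ht).2 (fun e' he' => hall e' (Or.inr he'))]
        omega

-- per-entry telescoping identities between coverage and difference marks
theorem pvHCov_base (n m : Int) (e : List Int) (hOK : pvEntryOK n m e) (a : Int) :
    pvHCov a 0 e = pvDh a 0 e := by
  obtain ⟨i, j, a1, rfl, h⟩ := hOK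
  simp only [pvHCov, pvDh, abs_le]
  split_ifs <;> omega

theorem pvHCov_step (n m : Int) (e : List Int) (hOK : pvEntryOK n m e) (a b : Int) (hb : 1 ≤ b) :
    pvHCov a b e - pvHCov a (b - 1) e = pvDh a b e := by
  obtain ⟨i, j, a1, rfl, h⟩ := hOK
  simp only [pvHCov, pvDh, abs_le]
  split_ifs <;> omega

theorem pvVCov_base (n m : Int) (e : List Int) (hOK : pvEntryOK n m e) (b : Int) :
    pvVCov 0 b e = pvDv 0 b e := by
  obtain ⟨i, j, a1, rfl, h⟩ := hOK
  simp only [pvVCov, pvDv, abs_le]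
  split_ifs <;> omega

theorem pvVCov_step (n m : Int) (e : List Int) (hOK : pvEntryOK n m e) (a b : Int) (ha : 1 ≤ a) :
    pvVCov a b e - pvVCov (a - 1) b e = pvDv a b e := by
  obtain ⟨i, j, a1, rfl, h⟩ := hOK
  simp only [pvVCov, pvDv, abs_le]
  split_ifs <;> omega

-- the accumulated h array counts the horizontal covers
theorem pvHA_count (n m : Int) (l : List (List String)) (hn : 0 < n) (hm : 0 < m)
    (hlen : n ≤ (l.length : Int)) (hrows : ∀ r ∈ l.take n.toNat, m ≤ (r.length : Int))
    (a b : Int) (ha : 0 ≤ a) (ha2 : a < n) (hb : 0 ≤ b) (hb2 : b < m) :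
    pvHA n m l a b = ((pvTotC n m l).map (pvHCov a b)).sum := by
  have hT := pvStarsA_fst n m l hn hm hlen hrows
  have hhv := pvStarsA_hv n m l hn hm hlen hrows
  have hOK := pvTotC_entries n m l hn hm hlen hrows
  rw [pvHA_fwd]
  have main : ∀ k : Nat, (k : Int) < m →
      pvFwd (fun _ _ => false) n m (pvStarsA n m l).2.1 a k = ((pvTotC n m l).map (pvHCov a (k : Int))).sum := by
    intro k
    induction k with
    | zero =>
        intro hk
        simp only [Nat.cast_zero]
        rw [pvFwd_outside _ n m _ a 0 (by omega), (hhv a 0).1, hT]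
        exact congrArg _ (List.map_congr_left (fun e he => (pvHCov_base n m e (hOK e he) a).symm))
    | succ k' ih =>
        intro hk
        have hks : ((k' + 1 : Nat) : Int) = (k' : Int) + 1 := by push_cast; ring
        rw [hks, pvFwd_rec _ n m _ a ((k' : Int) + 1) ha ha2 (by omega) (by omega), if_neg (by simp),
            (hhv a ((k' : Int) + 1)).1, hT,
            show (k' : Int) + 1 - 1 = (k' : Int) from by ring, ih (by omega)]
        have hstep : ((pvTotC n m l).map (pvDh a ((k' : Int) + 1))).sum
            = ((pvTotC n m l).map (pvHCov a ((k' : Int) + 1))).sum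
              - ((pvTotC n m l).map (pvHCov a (k' : Int))).sum := by
          rw [← pvSum_sub]
          refine congrArg _ (List.map_congr_left (fun e he => ?_))
          have := pvHCov_step n m e (hOK e he) a ((k' : Int) + 1) (by omega)
          rw [show (k' : Int) + 1 - 1 = (k' : Int) by ring] at this
          omega
        omega
  have hbn : b = ((b.toNat : Nat) : Int) := by omega
  rw [hbn]
  exact main b.toNat (by omega)

theorem pvVA_count (n m : Int) (l : List (List String)) (hn : 0 < n) (hm : 0 < m)
    (hlen : n ≤ (l.length : Int)) (hrows : ∀ r ∈ l.take n.toNat, m ≤ (r.length : Int))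
    (a b : Int) (ha : 0 ≤ a) (ha2 : a < n) (hb : 0 ≤ b) (hb2 : b < m) :
    pvVA n m l a b = ((pvTotC n m l).map (pvVCov a b)).sum := by
  have hT := pvStarsA_fst n m l hn hm hlen hrows
  have hhv := pvStarsA_hv n m l hn hm hlen hrows
  have hOK := pvTotC_entries n m l hn hm hlen hrows
  rw [pvVA_fwd]
  show pvFwd (fun _ _ => false) m n (pvFlip (pvStarsA n m l).2.2) b a = _
  have main : ∀ k : Nat, (k : Int) < n →
      pvFwd (fun _ _ => false) m n (pvFlip (pvStarsA n m l).2.2) b k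
        = ((pvTotC n m l).map (pvVCov (k : Int) b)).sum := by
    intro k
    induction k with
    | zero =>
        intro hk
        simp only [Nat.cast_zero]
        rw [pvFwd_outside _ m n _ b 0 (by omega)]
        show (pvStarsA n m l).2.2 0 b = _
        rw [(hhv 0 b).2, hT]
        exact congrArg _ (List.map_congr_left (fun e he => (pvVCov_base n m e (hOK e he) b).symm))
    | succ k' ih =>
        intro hk
        have hks : ((k' + 1 : Nat) : Int) = (k' : Int) + 1 := by push_cast; ring
        rw [hks, pvFwd_rec _ m n _ b ((k' : Int) + 1) hb hb2 (by omega) (by omega), if_neg (by simp),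
            show (k' : Int) + 1 - 1 = (k' : Int) from by ring, ih (by omega)]
        show (pvStarsA n m l).2.2 ((k' : Int) + 1) b + _ = _
        rw [(hhv ((k' : Int) + 1) b).2, hT]
        have hstep : ((pvTotC n m l).map (pvDv ((k' : Int) + 1) b)).sum
            = ((pvTotC n m l).map (pvVCov ((k' : Int) + 1) b)).sum
              - ((pvTotC n m l).map (pvVCov (k' : Int) b)).sum := by
          rw [← pvSum_sub]
          refine congrArg _ (List.map_congr_left (fun e he => ?_))
          have := pvVCov_step n m e (hOK e he) ((k' : Int) + 1) b (by omega)
          rw [show (k' : Int) + 1 - 1 = (k' : Int) by ring] at this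
          omega
        omega
  have han : a = ((a.toNat : Nat) : Int) := by omega
  rw [han]
  exact main a.toNat (by omega)


-- ===== B-side access lemmas =====
theorem pvRowsB_len (n m : Int) (l : List (List String)) (hn : 0 < n) :
    (pvRowsB n m l).length = n.toNat := by
  unfold pvRowsB
  rw [List.length_map, PySem.List.length_pyRange_one]
  omega

theorem pvRowsB_at (n m : Int) (l : List (List String)) (hn : 0 < n) (hm : 0 < m)
    (i : Int) (hi : 0 ≤ i) (hi2 : i < n) :
    PySem.List.pyGetD (pvRowsB n m l) i [] = pvRowCs m l i := by
  unfold pvRowsB pvRowCs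
  rw [PySem.List.pyGetD_map_pyRange_of_nonneg _ n i [] hi hi2,
      PySem.List.slice_to _ (by omega)]

theorem pvGetRB_eq (n m : Int) (l : List (List String)) (hn : 0 < n) (hm : 0 < m)
    (hlen : n ≤ (l.length : Int)) (hrows : ∀ r ∈ l.take n.toNat, m ≤ (r.length : Int))
    (i j : Int) (hi : 0 ≤ i) (hi2 : i < n) (hj : 0 ≤ j) (hj2 : j < m) :
    pvGetRB n m l i j = pvCellA l i j := by
  unfold pvGetRB
  rw [pvRowsB_at n m l hn hm i hi hi2, PySem.List.pyGetD_of_nonneg _ "" hj]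
  exact pvRowCs_getD n m l hlen hrows i hi hi2 j hj hj2

theorem pvColsB_at (n m : Int) (l : List (List String)) (hn : 0 < n) (hm : 0 < m)
    (hlen : n ≤ (l.length : Int)) (hrows : ∀ r ∈ l.take n.toNat, m ≤ (r.length : Int))
    (j : Int) (hj : 0 ≤ j) (hj2 : j < m) :
    PySem.List.pyGetD (pvColsB n m l) j [] = pvColCs n l j := by
  unfold pvColsB pvColCs
  rw [PySem.List.pyGetD_map_pyRange_of_nonneg _ m j [] hj hj2]
  refine List.map_congr_left (fun i hi => ?_)
  have hi' := (PySem.List.mem_pyRange_one).1 hi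
  exact pvGetRB_eq n m l hn hm hlen hrows i j (by omega) (by omega) hj hj2

theorem pvGiB_left (n m : Int) (l : List (List String)) (hn : 0 < n) (hm : 0 < m)
    (hlen : n ≤ (l.length : Int)) (hrows : ∀ r ∈ l.take n.toNat, m ≤ (r.length : Int))
    (i j : Int) (hi : 0 ≤ i) (hi2 : i < n) (hj : 0 ≤ j) (hj2 : j < m) :
    pvGiB (pvLeftB n m l) i j = pvLeftV m l i j := by
  unfold pvGiB pvLeftB pvLeftV
  have hL : i.toNat < (pvRowsB n m l).length := by rw [pvRowsB_len n m l hn]; omega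
  rw [PySem.List.pyGetD_of_nonneg _ [] hi, List.getD_eq_getElem _ _ (by simpa using hL),
      List.getElem_map, PySem.List.pyGetD_of_nonneg _ 0 hj, pvRunsB_go]
  congr 2
  have := pvRowsB_at n m l hn hm i hi hi2
  rw [PySem.List.pyGetD_of_nonneg _ [] hi, List.getD_eq_getElem _ _ hL] at this
  exact this

theorem pvGiB_right (n m : Int) (l : List (List String)) (hn : 0 < n) (hm : 0 < m)
    (hlen : n ≤ (l.length : Int)) (hrows : ∀ r ∈ l.take n.toNat, m ≤ (r.length : Int))
    (i j : Int) (hi : 0 ≤ i) (hi2 : i < n) (hj : 0 ≤ j) (hj2 : j < m) :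
    pvGiB (pvRightB n m l) i j = pvRightV m l i j := by
  unfold pvGiB pvRightB pvRightV
  have hL : i.toNat < (pvRowsB n m l).length := by rw [pvRowsB_len n m l hn]; omega
  have hRL : (pvRowCs m l i).length = m.toNat := by
    have := pvRowCs_len n m l (by omega) hlen hrows i hi hi2; omega
  have hrow : (pvRowsB n m l)[i.toNat] = pvRowCs m l i := by
    have := pvRowsB_at n m l hn hm i hi hi2
    rwa [PySem.List.pyGetD_of_nonneg _ [] hi, List.getD_eq_getElem _ _ hL] at this
  rw [PySem.List.pyGetD_of_nonneg _ [] hi, List.getD_eq_getElem _ _ (by simpa using hL),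
      List.getElem_map, PySem.List.pyGetD_of_nonneg _ 0 hj, hrow, pvRunsB_go,
      pvRevGetD _ 0 j.toNat (by rw [pvRunsGo_length, List.length_reverse, hRL]; omega),
      pvRunsGo_length, List.length_reverse, hRL,
      show m.toNat - 1 - j.toNat = (m - 1 - j).toNat by omega]

theorem pvColsB_len (n m : Int) (l : List (List String)) (hm : 0 < m) :
    (pvColsB n m l).length = m.toNat := by
  unfold pvColsB
  rw [List.length_map, PySem.List.length_pyRange_one]
  omega

theorem pvGiB_up (n m : Int) (l : List (List String)) (hn : 0 < n) (hm : 0 < m)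
    (hlen : n ≤ (l.length : Int)) (hrows : ∀ r ∈ l.take n.toNat, m ≤ (r.length : Int))
    (i j : Int) (hi : 0 ≤ i) (hi2 : i < n) (hj : 0 ≤ j) (hj2 : j < m) :
    pvGiB (pvUpB n m l) j i = pvUpV n l i j := by
  unfold pvGiB pvUpB pvUpV
  have hL : j.toNat < (pvColsB n m l).length := by rw [pvColsB_len n m l hm]; omega
  have hcol : (pvColsB n m l)[j.toNat] = pvColCs n l j := by
    have := pvColsB_at n m l hn hm hlen hrows j hj hj2
    rwa [PySem.List.pyGetD_of_nonneg _ [] hj, List.getD_eq_getElem _ _ hL] at this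
  rw [PySem.List.pyGetD_of_nonneg _ [] hj, List.getD_eq_getElem _ _ (by simpa using hL),
      List.getElem_map, PySem.List.pyGetD_of_nonneg _ 0 hi, hcol, pvRunsB_go]

theorem pvGiB_down (n m : Int) (l : List (List String)) (hn : 0 < n) (hm : 0 < m)
    (hlen : n ≤ (l.length : Int)) (hrows : ∀ r ∈ l.take n.toNat, m ≤ (r.length : Int))
    (i j : Int) (hi : 0 ≤ i) (hi2 : i < n) (hj : 0 ≤ j) (hj2 : j < m) :
    pvGiB (pvDownB n m l) j i = pvDownV n l i j := by
  unfold pvGiB pvDownB pvDownV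
  have hL : j.toNat < (pvColsB n m l).length := by rw [pvColsB_len n m l hm]; omega
  have hCL : (pvColCs n l j).length = n.toNat := by
    have := pvColCs_len n l (by omega) j; omega
  have hcol : (pvColsB n m l)[j.toNat] = pvColCs n l j := by
    have := pvColsB_at n m l hn hm hlen hrows j hj hj2
    rwa [PySem.List.pyGetD_of_nonneg _ [] hj, List.getD_eq_getElem _ _ hL] at this
  rw [PySem.List.pyGetD_of_nonneg _ [] hj, List.getD_eq_getElem _ _ (by simpa using hL),
      List.getElem_map, PySem.List.pyGetD_of_nonneg _ 0 hi, hcol, pvRunsB_go,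
      pvRevGetD _ 0 i.toNat (by rw [pvRunsGo_length, List.length_reverse, hCL]; omega),
      pvRunsGo_length, List.length_reverse, hCL,
      show n.toNat - 1 - i.toNat = (n - 1 - i).toNat by omega]

-- B's tot is the canonical tot
theorem pvTotB_eq (n m : Int) (l : List (List String)) (hn : 0 < n) (hm : 0 < m)
    (hlen : n ≤ (l.length : Int)) (hrows : ∀ r ∈ l.take n.toNat, m ≤ (r.length : Int)) :
    pvTotB n m l = pvTotC n m l := by
  unfold pvTotB pvTotC
  refine PySem.List.foldl_congr_mem _ _ _ _ ?_
  intro acc i hi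
  have hi' := (PySem.List.mem_pyRange_one).1 hi
  refine PySem.List.foldl_congr_mem _ _ _ _ ?_
  intro acc2 j hj
  have hj' := (PySem.List.mem_pyRange_one).1 hj
  rw [pvGetRB_eq n m l hn hm hlen hrows i j (by omega) (by omega) (by omega) (by omega)]
  by_cases hs : pvCellA l i j = "*"
  · rw [if_pos (by simp [hs])]
    show (if 0 < min (min (min (pvGiB (pvLeftB n m l) i j) (pvGiB (pvRightB n m l) i j))
        (pvGiB (pvUpB n m l) j i)) (pvGiB (pvDownB n m l) j i) - 1
      then acc2 ++ [[i + 1, j + 1, min (min (min (pvGiB (pvLeftB n m l) i j) (pvGiB (pvRightB n m l) i j))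
        (pvGiB (pvUpB n m l) j i)) (pvGiB (pvDownB n m l) j i) - 1]] else acc2) = _
    rw [pvGiB_left n m l hn hm hlen hrows i j (by omega) (by omega) (by omega) (by omega),
        pvGiB_right n m l hn hm hlen hrows i j (by omega) (by omega) (by omega) (by omega),
        pvGiB_up n m l hn hm hlen hrows i j (by omega) (by omega) (by omega) (by omega),
        pvGiB_down n m l hn hm hlen hrows i j (by omega) (by omega) (by omega) (by omega)]
    show (if 0 < pvArm n m l i j then acc2 ++ [[i + 1, j + 1, pvArm n m l i j]] else acc2) = _
    by_cases hz : 0 < pvArm n m l i j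
    · rw [if_pos hz, if_pos ⟨hs, hz⟩]
    · rw [if_neg hz, if_neg (by rintro ⟨-, h0⟩; exact hz h0)]
  · rw [if_neg (by simp [hs]), if_neg (by rintro ⟨h0, -⟩; exact hs h0)]

-- coverage indicators are 0/1
theorem pvHCov_nonneg (a b : Int) (e : List Int) : 0 ≤ pvHCov a b e := by
  unfold pvHCov
  split
  · split_ifs <;> omega
  · omega

theorem pvVCov_nonneg (a b : Int) (e : List Int) : 0 ≤ pvVCov a b e := by
  unfold pvVCov
  split
  · split_ifs <;> omega
  · omega

-- B's cover test agrees with the coverage indicators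
theorem pvCovers_iff (i j : Int) (e : List Int) (hOK : ∃ r c a1 : Int, e = [r, c, a1]) :
    pvCovers i j e = true ↔ (pvHCov i j e ≠ 0 ∨ pvVCov i j e ≠ 0) := by
  obtain ⟨r, c, a1, rfl⟩ := hOK
  show ((r - 1 == i && decide (|j - (c - 1)| ≤ a1)) ||
        (c - 1 == j && decide (|i - (r - 1)| ≤ a1))) = true ↔ _
  simp only [Bool.or_eq_true, Bool.and_eq_true, beq_iff_eq, decide_eq_true_eq]
  show _ ↔ ((if r - 1 = i ∧ |j - (c - 1)| ≤ a1 then (1:Int) else 0) ≠ 0 ∨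
            (if c - 1 = j ∧ |i - (r - 1)| ≤ a1 then (1:Int) else 0) ≠ 0)
  constructor
  · rintro (⟨h1, h2⟩ | ⟨h1, h2⟩)
    · left; rw [if_pos ⟨h1, h2⟩]; omega
    · right; rw [if_pos ⟨h1, h2⟩]; omega
  · rintro (h | h)
    · left
      by_cases hc : r - 1 = i ∧ |j - (c - 1)| ≤ a1
      · exact hc
      · exact absurd (if_neg hc) h
    · right
      by_cases hc : c - 1 = j ∧ |i - (r - 1)| ≤ a1
      · exact hc
      · exact absurd (if_neg hc) h

theorem pvAny_congr (L : List Int) (f g : Int → Bool) (h : ∀ x ∈ L, f x = g x) :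
    L.any f = L.any g := by
  induction L with
  | nil => rfl
  | cons x t ih =>
      simp only [List.any_cons]
      rw [h x (by simp), ih (fun y hy => h y (by simp [hy]))]

-- the uncovered-star tests of A and B agree
theorem pvBad_eq (n m : Int) (l : List (List String)) (hn : 0 < n) (hm : 0 < m)
    (hlen : n ≤ (l.length : Int)) (hrows : ∀ r ∈ l.take n.toNat, m ≤ (r.length : Int)) :
    ((PySem.List.pyRange 0 n 1).any (fun i =>
      (PySem.List.pyRange 0 m 1).any (fun j =>
        pvCellA l i j == "*" && pvHA n m l i j == 0 && pvVA n m l i j == 0)))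
    = ((PySem.List.pyRange 0 n 1).any (fun i =>
      (PySem.List.pyRange 0 m 1).any (fun j =>
        pvGetRB n m l i j == "*" && !((pvTotB n m l).any (pvCovers i j))))) := by
  refine pvAny_congr _ _ _ ?_
  intro i hi
  have hi' := (PySem.List.mem_pyRange_one).1 hi
  refine pvAny_congr _ _ _ ?_
  intro j hj
  have hj' := (PySem.List.mem_pyRange_one).1 hj
  rw [pvGetRB_eq n m l hn hm hlen hrows i j (by omega) (by omega) (by omega) (by omega),
      pvTotB_eq n m l hn hm hlen hrows]
  by_cases hs : pvCellA l i j = "*"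
  · rw [show (pvCellA l i j == "*") = true from by simp [hs]]
    simp only [Bool.true_and]
    rw [pvHA_count n m l hn hm hlen hrows i j (by omega) (by omega) (by omega) (by omega),
        pvVA_count n m l hn hm hlen hrows i j (by omega) (by omega) (by omega) (by omega)]
    have hOK := pvTotC_entries n m l hn hm hlen hrows
    rw [Bool.eq_iff_iff]
    simp only [Bool.and_eq_true, beq_iff_eq, Bool.not_eq_true', List.any_eq_false]
    constructor
    · rintro ⟨hH, hV⟩ e he
      have h1 := (pvSum_zero_iff _ _ (fun e' he' => pvHCov_nonneg i j e')).1 hH e he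
      have h2 := (pvSum_zero_iff _ _ (fun e' he' => pvVCov_nonneg i j e')).1 hV e he
      have h3 : ∃ r c a1 : Int, e = [r, c, a1] := by
        obtain ⟨i0, j0, a1, rfl, -⟩ := hOK e he
        exact ⟨i0 + 1, j0 + 1, a1, rfl⟩
      rw [pvCovers_iff i j e h3, not_or]
      exact ⟨by omega, by omega⟩
    · intro hall
      constructor
      · refine (pvSum_zero_iff _ _ (fun e' he' => pvHCov_nonneg i j e')).2 (fun e he => ?_)
        have h3 : ∃ r c a1 : Int, e = [r, c, a1] := by
          obtain ⟨i0, j0, a1, rfl, -⟩ := hOK e he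
          exact ⟨i0 + 1, j0 + 1, a1, rfl⟩
        have := hall e he
        rw [pvCovers_iff i j e h3, not_or] at this
        omega
      · refine (pvSum_zero_iff _ _ (fun e' he' => pvVCov_nonneg i j e')).2 (fun e he => ?_)
        have h3 : ∃ r c a1 : Int, e = [r, c, a1] := by
          obtain ⟨i0, j0, a1, rfl, -⟩ := hOK e he
          exact ⟨i0 + 1, j0 + 1, a1, rfl⟩
        have := hall e he
        rw [pvCovers_iff i j e h3, not_or] at this
        omega
  · rw [show (pvCellA l i j == "*") = false from by simp [hs]]
    simp

-- degenerate grids: A collects nothing and reports nothing bad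
theorem pvStarsA_empty (n m : Int) (l : List (List String)) (h : n ≤ 0 ∨ m ≤ 0) :
    (pvStarsA n m l).1 = [] := by
  unfold pvStarsA
  rcases h with h | h
  · rw [PySem.List.pyRange_one_eq_nil h]
    rfl
  · refine pvFoldInv (fun (st : List (List Int) × (Int → Int → Int) × (Int → Int → Int)) =>
      st.1 = []) _ _ _ rfl ?_
    intro st i _ hC
    rw [PySem.List.pyRange_one_eq_nil (by omega : m ≤ 0)]
    exact hC

theorem pvBadA_empty (n m : Int) (l : List (List String)) (h : n ≤ 0 ∨ m ≤ 0) :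
    ((PySem.List.pyRange 0 n 1).any (fun i =>
      (PySem.List.pyRange 0 m 1).any (fun j =>
        pvCellA l i j == "*" && pvHA n m l i j == 0 && pvVA n m l i j == 0))) = false := by
  rcases h with h | h
  · rw [PySem.List.pyRange_one_eq_nil h]; rfl
  · simp only [List.any_eq_false]
    intro i _
    rw [PySem.List.pyRange_one_eq_nil (by omega : m ≤ 0)]
    simp

-- ===== VERDICT (by name: the statement is the Claim_ definition above) =====
theorem solve_from_grid_spec : Claim_equal_solve_from_grid := by
  intro n m l hDom hPre
  unfold Spec_solve_from_grid
  by_cases hnm : n ≤ 0 ∨ m ≤ 0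
  · show solve_from_grid n m l = solve_from_grid_alt n m l
    unfold solve_from_grid solve_from_grid_alt
    rw [if_pos hnm, pvBadA_empty n m l hnm, if_neg (by simp), pvStarsA_empty n m l hnm]
    rfl
  · have hn : 0 < n := by omega
    have hm : 0 < m := by omega
    obtain ⟨hlen, hrows⟩ := hPre hn hm
    show solve_from_grid n m l = solve_from_grid_alt n m l
    unfold solve_from_grid solve_from_grid_alt
    rw [if_neg hnm, pvBad_eq n m l hn hm hlen hrows, pvStarsA_fst n m l hn hm hlen hrows,
        ← pvTotB_eq n m l hn hm hlen hrows]
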